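-- pv_equiv track=rewrite | github.com/george-poole/LUCiFEx | lucifex/utils/str_utils.py | str_plain
-- ===== SOURCE A (Python) =====
-- TEX_SYMBOLS = (
--         # lower case Greek
--         "alpha",
--         "beta",
--         "gamma",
--         "delta",
--         'epsilon',
--         'zeta',
--         'eta',
--         'theta',
--         'iota',
--         'kappa',
--         'lambda',
--         'mu',
--         'nu',
--         'xi',
--         'pi',
--         'rho',
--         'sigma',
--         'tau',
--         'upsilon',
--         'phi',
--         'chi',
--         'psi',
--         'omega',
--         # upper case Greek
--         'Gamma',
--         'Delta',
--         'Theta',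
--         'Lambda',
--         'Xi',
--         'Pi',
--         'Sigma',
--         'Upsilon',
--         'Phi',
--         'Psi',
--         'Omega',
--         # mathematical operations
--         "times",
--         "cdot",
--     )
--
-- def str_plain(
--     label: str | None,
--     strip_wspace: bool = True,
-- ) -> str:
--     """
--     Strips any Tex formatting.
--     """
--     if label == "" or label is None:
--         return ""
--     if label[0] == '$' and label[-1] == '$':
--         return str_plain(label[1:-1])
--
--     for i in TEX_SYMBOLS:
--         if f'\\{i}' in label:
--             label = label.replace(f'\\{i}', i)
--
--     if strip_wspace:
--         label = label.replace(' ', '')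
--
--     return label
-- ===== SOURCE B (Python) =====
-- TEX_SYMBOLS = (
--         # lower case Greek
--         "alpha", "beta", "gamma", "delta", 'epsilon', 'zeta', 'eta', 'theta',
--         'iota', 'kappa', 'lambda', 'mu', 'nu', 'xi', 'pi', 'rho', 'sigma',
--         'tau', 'upsilon', 'phi', 'chi', 'psi', 'omega',
--         # upper case Greek
--         'Gamma', 'Delta', 'Theta', 'Lambda', 'Xi', 'Pi', 'Sigma', 'Upsilon',
--         'Phi', 'Psi', 'Omega',
--         # mathematical operations
--         "times", "cdot",
--     )
--
-- def str_plain(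
--     label,
--     strip_wspace=True,
-- ):
--     """
--     Strips any Tex formatting (single left-to-right scan).
--     """
--     if label == "" or label is None:
--         return ""
--     if label[0] == '$' and label[-1] == '$':
--         return str_plain(label[1:-1])
--
--     out = []
--     i = 0
--     n = len(label)
--     while i < n:
--         c = label[i]
--         if c == '\\':
--             for s in TEX_SYMBOLS:
--                 if label.startswith(s, i + 1):
--                     out.append(s)
--                     i += 1 + len(s)
--                     break
--             else:
--                 out.append(c)
--                 i += 1
--         elif c == ' ' and strip_wspace:
--             i += 1
--         else:
--             out.append(c)
--             i += 1
--     return ''.join(out)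
-- ===== Notes on version B (the rewrite author's own statement) =====
-- stated objective: alternative
-- what changed: Replaced the 37 sequential whole-string replace passes with a single left-to-right scan that, at each backslash, matches one TEX_SYMBOLS command in place (and drops spaces inline), so the string is traversed once instead of 37 times.
-- intended difference: On labels containing one of 42 rare cascade fragments such as '\th\eta' (a non-command backslash piece whose replacement output spells a later TEX command), A's sequential replaces re-interpret their own output and strip a backslash that never headed a known command (A('\th\eta')='theta'), while B's single scan only strips backslashes that actually head a TEX_SYMBOLS command (B('\th\eta')='\theta'), which is the intended de-TeX-ing. — e.g. on str_plain(some "\\th\\eta", true): A returns "theta", B returns "\\theta"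
import Mathlib
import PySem

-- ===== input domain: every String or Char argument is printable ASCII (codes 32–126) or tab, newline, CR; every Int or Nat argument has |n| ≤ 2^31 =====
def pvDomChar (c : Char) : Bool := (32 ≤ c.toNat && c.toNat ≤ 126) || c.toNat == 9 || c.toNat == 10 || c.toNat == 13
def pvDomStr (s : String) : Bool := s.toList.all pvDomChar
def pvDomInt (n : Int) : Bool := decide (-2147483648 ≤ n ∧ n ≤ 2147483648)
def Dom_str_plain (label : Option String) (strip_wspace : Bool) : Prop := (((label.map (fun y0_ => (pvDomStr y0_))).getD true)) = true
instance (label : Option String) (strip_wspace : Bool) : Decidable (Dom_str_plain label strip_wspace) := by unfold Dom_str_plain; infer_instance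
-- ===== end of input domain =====

-- B replaces A's 37 sequential whole-string `replace` passes by one left-to-right scan (objective:
-- alternative, same cost).  On labels containing one of 42 rare cascade fragments A's passes
-- re-interpret their own output; that is stated as an intended difference D_ below.  Both ports work
-- on `String.toList` via PySem.Chars primitives; recursions are made structural with fuel = string
-- length, a pure totality device.

-- ===== PORT A =====
-- TEX_SYMBOLS, in tuple order
def pvSyms : List (List Char) :=
  ["alpha".toList, "beta".toList, "gamma".toList, "delta".toList, "epsilon".toList,
   "zeta".toList, "eta".toList, "theta".toList, "iota".toList, "kappa".toList,
   "lambda".toList, "mu".toList, "nu".toList, "xi".toList, "pi".toList, "rho".toList,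
   "sigma".toList, "tau".toList, "upsilon".toList, "phi".toList, "chi".toList,
   "psi".toList, "omega".toList,
   "Gamma".toList, "Delta".toList, "Theta".toList, "Lambda".toList, "Xi".toList,
   "Pi".toList, "Sigma".toList, "Upsilon".toList, "Phi".toList, "Psi".toList,
   "Omega".toList, "times".toList, "cdot".toList]

-- A's for-loop: `if f'\{i}' in label: label = label.replace(f'\{i}', i)`
def pvTexLoop (cs : List Char) : List Char :=
  pvSyms.foldl (fun l s => if PySem.Chars.isIn ('\\' :: s) l then PySem.Chars.replace l ('\\' :: s) s else l) cs

-- A on the char list (after the None check): "" guard, `$...$` peel, replace loop, space strip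
def pvGoA (fuel : Nat) (cs : List Char) (strip_wspace : Bool) : List Char :=
  match fuel with
  | 0 => []
  | fuel + 1 =>
    if cs = [] then []
    else if PySem.List.pyGet? cs 0 = some '$' ∧ PySem.List.pyGet? cs (-1) = some '$' then
      pvGoA fuel (PySem.List.slice cs (some 1) (some (-1))) true
    else
      let r := pvTexLoop cs
      if strip_wspace then PySem.Chars.replace r [' '] [] else r

def str_plain (label : Option String) (strip_wspace : Bool) : String :=
  match label with
  | none => ""
  | some l => String.ofList (pvGoA l.toList.length l.toList strip_wspace)

-- ===== PORT B =====
-- `for s in TEX_SYMBOLS: if label.startswith(s, i+1): ...` — first symbol matching at the scan position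
def pvFirstSym (t : List Char) : Option (List Char) :=
  pvSyms.find? (fun s => s.isPrefixOf t)

-- B's while-loop: one scan, matching a command at each backslash, skipping spaces inline
def pvScanB (strip : Bool) (fuel : Nat) (cs : List Char) : List Char :=
  match fuel, cs with
  | _, [] => []
  | 0, _ => []
  | fuel + 1, c :: t =>
    if c = '\\' then
      match pvFirstSym t with
      | some s => s ++ pvScanB strip fuel (t.drop s.length)
      | none => c :: pvScanB strip fuel t
    else if c = ' ' ∧ strip then pvScanB strip fuel t
    else c :: pvScanB strip fuel t

def pvGoB (fuel : Nat) (cs : List Char) (strip_wspace : Bool) : List Char :=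
  match fuel with
  | 0 => []
  | fuel + 1 =>
    if cs = [] then []
    else if PySem.List.pyGet? cs 0 = some '$' ∧ PySem.List.pyGet? cs (-1) = some '$' then
      pvGoB fuel (PySem.List.slice cs (some 1) (some (-1))) true
    else pvScanB strip_wspace cs.length cs

def str_plain_alt (label : Option String) (strip_wspace : Bool) : String :=
  match label with
  | none => ""
  | some l => String.ofList (pvGoB l.toList.length l.toList strip_wspace)

-- ===== PRECONDITION & SPEC =====
-- On labels containing one of the 42 cascade fragments below (substrings '\w\cmd...' whose pieces
-- reassemble a later-listed TEX_SYMBOLS command, e.g. '\th\eta'), A's sequential replace passes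
-- re-interpret their own output and strip a backslash that never headed a known command
-- (A('\th\eta') = 'theta'), while B's single scan only strips backslashes actually heading a
-- TEX_SYMBOLS command (B('\th\eta') = '\theta'), which is the intended de-TeX-ing.
def pvMagic : List String :=
  ["\\Del\\tau", "\\Delt\\alpha", "\\Gamm\\alpha", "\\Lambd\\alpha", "\\Ome\\gamma",
   "\\Omeg\\alpha", "\\P\\iota", "\\P\\sigma", "\\Ph\\iota", "\\Ps\\iota",
   "\\Sigm\\alpha", "\\Th\\eta", "\\The\\tau", "\\Thet\\alpha", "\\U\\psilo\\nu",
   "\\U\\psilon", "\\Upsilo\\nu", "\\X\\iota", "\\bet\\alpha", "\\cdo\\tau",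
   "\\cdo\\theta", "\\cdo\\times", "\\ch\\iota", "\\delt\\alpha", "\\et\\alpha",
   "\\gamm\\alpha", "\\iot\\alpha", "\\kapp\\alpha", "\\lambd\\alpha", "\\ome\\gamma",
   "\\omeg\\alpha", "\\p\\iota", "\\p\\sigma", "\\ph\\iota", "\\ps\\iota",
   "\\sigm\\alpha", "\\th\\eta", "\\thet\\alpha", "\\time\\sigma", "\\upsilo\\nu",
   "\\x\\iota", "\\zet\\alpha"]

def D_str_plain (label : Option String) (strip_wspace : Bool) : Prop :=
  ∃ m ∈ pvMagic, PySem.Str.isIn m (label.getD "") = true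
instance (label : Option String) (strip_wspace : Bool) : Decidable (D_str_plain label strip_wspace) := by
  unfold D_str_plain; infer_instance

def Spec_str_plain (label : Option String) (strip_wspace : Bool) (out : String) : Prop :=
  ¬ D_str_plain label strip_wspace → out = str_plain_alt label strip_wspace
instance (label : Option String) (strip_wspace : Bool) (out : String) : Decidable (Spec_str_plain label strip_wspace out) := by
  unfold Spec_str_plain; infer_instance

def pvDiffWitness_str_plain : Option String × Bool := (some "\\th\\eta", true)
def pvDiffWitnessOut_str_plain : String × String := ("theta", "\\theta")

-- ===== CLAIM (what is proved, stated in full; the proofs are below) =====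
def Claim_unchanged_str_plain : Prop := ∀ (label : Option String) (strip_wspace : Bool), Dom_str_plain label strip_wspace → Spec_str_plain label strip_wspace (str_plain label strip_wspace)
def Claim_changed_str_plain : Prop := Dom_str_plain (pvDiffWitness_str_plain.1) (pvDiffWitness_str_plain.2) ∧ D_str_plain (pvDiffWitness_str_plain.1) (pvDiffWitness_str_plain.2) ∧ str_plain (pvDiffWitness_str_plain.1) (pvDiffWitness_str_plain.2) = pvDiffWitnessOut_str_plain.1 ∧ str_plain_alt (pvDiffWitness_str_plain.1) (pvDiffWitness_str_plain.2) = pvDiffWitnessOut_str_plain.2 ∧ pvDiffWitnessOut_str_plain.1 ≠ pvDiffWitnessOut_str_plain.2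
def Claim_exact_str_plain : Prop := ∀ (label : Option String) (strip_wspace : Bool), Dom_str_plain label strip_wspace → D_str_plain label strip_wspace → str_plain label strip_wspace ≠ str_plain_alt label strip_wspace

-- ===== LEMMAS AND PROOFS =====

-- `NoMagic cs`: no cascade fragment occurs in cs
def pvMagicChars : List (List Char) := pvMagic.map String.toList
def NoMagic (cs : List Char) : Prop := ∀ m ∈ pvMagicChars, ¬ m <:+: cs

theorem noMagic_infix {a cs : List Char} (h : a <:+: cs) (hnm : NoMagic cs) : NoMagic a :=
  fun m hm hma => hnm m hm (hma.trans h)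

def repAll (pat new : List Char) (fuel : Nat) (l : List Char) : List Char :=
  match fuel, l with
  | _, [] => []
  | 0, _ => []
  | fuel + 1, c :: t =>
    if pat ≠ [] ∧ pat.isPrefixOf (c :: t) then new ++ repAll pat new fuel ((c :: t).drop pat.length)
    else c :: repAll pat new fuel t

theorem replace_go_eq (pat new : List Char) (hp : pat ≠ []) :
    ∀ (fuel : Nat) (l acc : List Char), l.length ≤ fuel →
      PySem.Chars.replace.go pat new fuel l acc = acc.reverse ++ repAll pat new fuel l := by
  intro fuel
  induction fuel with
  | zero =>
    intro l acc h
    have hl : l = [] := by cases l <;> simp_all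
    subst hl
    simp [PySem.Chars.replace.go, repAll]
  | succ f ih =>
    intro l acc h
    cases l with
    | nil => simp [PySem.Chars.replace.go, repAll]
    | cons c t =>
      by_cases hpre : pat.isPrefixOf (c :: t)
      · have hlen : ((c :: t).drop pat.length).length ≤ f := by
          have : 1 ≤ pat.length := by cases pat <;> simp_all
          simp only [List.length_drop, List.length_cons] at *
          omega
        simp only [PySem.Chars.replace.go, hpre, if_pos]
        rw [ih _ _ hlen]
        show _ = acc.reverse ++ repAll pat new (f+1) (c :: t)
        simp only [repAll]
        rw [if_pos ⟨hp, hpre⟩]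
        simp
      · simp only [PySem.Chars.replace.go, hpre, Bool.false_eq_true, if_false]
        rw [ih _ _ (by simp at h ⊢; omega)]
        show _ = acc.reverse ++ repAll pat new (f+1) (c :: t)
        simp only [repAll]
        rw [if_neg (by simp [hpre])]
        simp

theorem replace_eq_repAll (l pat new : List Char) (hp : pat ≠ []) :
    PySem.Chars.replace l pat new = repAll pat new l.length l := by
  unfold PySem.Chars.replace
  rw [if_neg (by simp [hp]), replace_go_eq pat new hp l.length l [] le_rfl]
  simp

theorem repAll_fuel (pat new : List Char) :
    ∀ (f : Nat) (l : List Char) (g : Nat), l.length ≤ f → l.length ≤ g →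
      repAll pat new f l = repAll pat new g l := by
  intro f
  induction f with
  | zero => intro l g h _; have : l = [] := by cases l <;> simp_all
            subst this; cases g <;> simp [repAll]
  | succ f ih =>
    intro l g hf hg
    cases l with
    | nil => cases g <;> simp [repAll]
    | cons c t =>
      cases g with
      | zero => simp at hg
      | succ g =>
        simp only [repAll]
        split
        · rename_i hcond
          have h1 : 1 ≤ pat.length := by rcases hcond with ⟨h1, _⟩; cases pat <;> simp_all
          have : ((c :: t).drop pat.length).length ≤ f ∧ ((c :: t).drop pat.length).length ≤ g := by
            simp only [List.length_drop, List.length_cons] at *; omega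
          rw [ih _ _ this.1 this.2]
        · simp only [List.length_cons] at hf hg
          exact congrArg (c :: ·) (ih t g (by omega) (by omega))

theorem repAll_of_not_infix (pat new : List Char) :
    ∀ (fuel : Nat) (l : List Char), l.length ≤ fuel → ¬ pat <:+: l → repAll pat new fuel l = l := by
  intro fuel
  induction fuel with
  | zero => intro l h _; have : l = [] := by cases l <;> simp_all
            subst this; simp [repAll]
  | succ f ih =>
    intro l hf h
    cases l with
    | nil => simp [repAll]
    | cons c t =>
      simp only [repAll]
      rw [if_neg (by
        rintro ⟨-, hpre⟩
        exact h ((List.isPrefixOf_iff_prefix.mp hpre).isInfix))]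
      exact congrArg (c :: ·) (ih t (by simp at hf; omega)
        (fun hi => h (hi.trans (List.suffix_cons c t).isInfix)))

theorem repAll_append_nobs (p' new : List Char) :
    ∀ (a : List Char) (f : Nat) (b : List Char), '\\' ∉ a → (a ++ b).length ≤ f →
    repAll ('\\' :: p') new f (a ++ b) = a ++ repAll ('\\' :: p') new b.length b := by
  intro a
  induction a with
  | nil => intro f b _ hf; simpa using repAll_fuel ('\\' :: p') new f b b.length (by simpa using hf) le_rfl
  | cons c a ih =>
    intro f b ha hf
    have hc : c ≠ '\\' := fun h => ha (h ▸ List.mem_cons_self)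
    cases f with
    | zero => simp at hf
    | succ f =>
      simp only [List.cons_append, repAll]
      rw [if_neg (by
        rintro ⟨-, hpre⟩
        rw [List.isPrefixOf_iff_prefix] at hpre
        rw [List.cons_prefix_cons] at hpre
        exact hc hpre.1.symm)]
      simp only [List.length_cons, List.length_append] at hf
      rw [ih f b (fun h => ha (List.mem_cons_of_mem _ h)) (by simp; omega)]

def scanP (P : List (List Char)) (fuel : Nat) (cs : List Char) : List Char :=
  match fuel, cs with
  | _, [] => []
  | 0, _ => []
  | fuel + 1, c :: t =>
    if c = '\\' then
      match P.find? (fun s => s.isPrefixOf t) with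
      | some s => s ++ scanP P fuel (t.drop s.length)
      | none => c :: scanP P fuel t
    else c :: scanP P fuel t

theorem scanP_fuel (P : List (List Char)) :
    ∀ (f : Nat) (cs : List Char) (g : Nat), cs.length ≤ f → cs.length ≤ g →
      scanP P f cs = scanP P g cs := by
  intro f
  induction f with
  | zero => intro cs g h _; have : cs = [] := by cases cs <;> simp_all
            subst this; cases g <;> simp [scanP]
  | succ f ih =>
    intro cs g hf hg
    cases cs with
    | nil => cases g <;> simp [scanP]
    | cons c t =>
      cases g with
      | zero => simp at hg
      | succ g =>
        simp only [List.length_cons] at hf hg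
        simp only [scanP]
        split
        · cases hfind : P.find? (fun s => s.isPrefixOf t) with
          | some s =>
            exact congrArg (s ++ ·) (ih _ g (by simp only [List.length_drop]; omega)
              (by simp only [List.length_drop]; omega))
          | none =>
            exact congrArg (c :: ·) (ih t g (by omega) (by omega))
        · exact congrArg (c :: ·) (ih t g (by omega) (by omega))

theorem scanP_nil_left : ∀ (fuel : Nat) (cs : List Char), cs.length ≤ fuel → scanP [] fuel cs = cs := by
  intro fuel
  induction fuel with
  | zero => intro cs h; have : cs = [] := by cases cs <;> simp_all
            subst this; simp [scanP]
  | succ f ih =>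
    intro cs hf
    cases cs with
    | nil => simp [scanP]
    | cons c t =>
      simp only [scanP, List.find?_nil]
      split <;> exact congrArg (c :: ·) (ih t (by simp at hf; omega))

theorem scanP_append_nobs (P : List (List Char)) :
    ∀ (a : List Char) (f : Nat) (b : List Char), '\\' ∉ a → (a ++ b).length ≤ f →
    scanP P f (a ++ b) = a ++ scanP P b.length b := by
  intro a
  induction a with
  | nil => intro f b _ hf; simpa using scanP_fuel P f b b.length (by simpa using hf) le_rfl
  | cons c a ih =>
    intro f b ha hf
    have hc : c ≠ '\\' := fun h => ha (h ▸ List.mem_cons_self)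
    cases f with
    | zero => simp at hf
    | succ f =>
      simp only [List.cons_append, scanP]
      rw [if_neg hc]
      simp only [List.length_cons, List.length_append] at hf
      rw [ih f b (fun h => ha (List.mem_cons_of_mem _ h)) (by simp; omega)]

inductive Creates (P : List (List Char)) : List Char → List Char → Prop where
  | stop (z v : List Char) (k : Nat) (s₁ t₁ : List Char)
      (hk : k < z.length) (hs : s₁ ∈ P) (hv : v = z.take k ++ '\\' :: t₁)
      (hpre : s₁ <+: t₁) (hz : (z.drop k) <+: s₁) : Creates P z v
  | orig (z v : List Char) (k : Nat) (s₁ t₁ : List Char)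
      (hk : k < z.length) (hs : s₁ ∈ P) (hv : v = z.take k ++ '\\' :: t₁)
      (hpre : s₁ <+: t₁) (hz : s₁ <+: (z.drop k)) (hlt : s₁.length < (z.drop k).length)
      (hrest : ((z.drop k).drop s₁.length) <+: (t₁.drop s₁.length)) : Creates P z v
  | deep (z v : List Char) (k : Nat) (s₁ t₁ : List Char)
      (hk : k < z.length) (hs : s₁ ∈ P) (hv : v = z.take k ++ '\\' :: t₁)
      (hpre : s₁ <+: t₁) (hz : s₁ <+: (z.drop k)) (hlt : s₁.length < (z.drop k).length)
      (hrec : Creates P ((z.drop k).drop s₁.length) (t₁.drop s₁.length)) : Creates P z v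

theorem creates_cons (P : List (List Char)) (c : Char) (z v : List Char)
    (h : Creates P z v) : Creates P (c :: z) (c :: v) := by
  cases h with
  | stop z v k s₁ t₁ hk hs hv hpre hz =>
    exact Creates.stop _ _ (k+1) s₁ t₁ (by simpa using hk) hs (by simp [hv]) hpre (by simpa using hz)
  | orig z v k s₁ t₁ hk hs hv hpre hz hlt hrest =>
    exact Creates.orig _ _ (k+1) s₁ t₁ (by simpa using hk) hs (by simp [hv]) hpre
      (by simpa using hz) (by simpa using hlt) (by simpa using hrest)
  | deep z v k s₁ t₁ hk hs hv hpre hz hlt hrec =>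
    exact Creates.deep _ _ (k+1) s₁ t₁ (by simpa using hk) hs (by simp [hv]) hpre
      (by simpa using hz) (by simpa using hlt) (by simpa using hrec)

theorem prefix_scanP (P : List (List Char)) :
    ∀ (fuel : Nat) (v z : List Char), v.length ≤ fuel → z ≠ [] → '\\' ∉ z →
      z <+: (scanP P fuel v) → z <+: v ∨ Creates P z v := by
  intro fuel
  induction fuel with
  | zero =>
    intro v z hf hz _ hpre
    have : v = [] := by cases v <;> simp_all
    subst this
    simp only [scanP] at hpre
    exact absurd (List.prefix_nil.mp hpre) hz
  | succ f ih =>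
    intro v z hf hz hnb hpre
    cases v with
    | nil =>
      simp only [scanP] at hpre
      exact absurd (List.prefix_nil.mp hpre) hz
    | cons c t =>
      simp only [List.length_cons] at hf
      by_cases hc : c = '\\'
      · subst hc
        cases hfind : List.find? (fun s => s.isPrefixOf t) P with
        | none =>
          simp only [scanP, hfind, if_true] at hpre
          cases z with
          | nil => exact absurd rfl hz
          | cons z₀ z' =>
            rw [List.cons_prefix_cons] at hpre
            exact absurd (hpre.1 ▸ List.mem_cons_self) hnb
        | some s =>
          simp only [scanP, hfind, if_true] at hpre
          have hsP : s ∈ P := List.mem_of_find?_eq_some hfind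
          have hst : s <+: t := List.isPrefixOf_iff_prefix.mp (by simpa using List.find?_some hfind)
          by_cases hlen : z.length ≤ s.length
          · have hzs : z <+: s := (List.isPrefix_append_of_length hlen).mp hpre
            exact Or.inr (Creates.stop z _ 0 s t (List.length_pos_of_ne_nil hz) hsP (by simp) hst
              (by simpa using hzs))
          · rw [not_le] at hlen
            have hsz : s <+: z :=
              List.prefix_of_prefix_length_le (List.prefix_append s _) hpre (le_of_lt hlen)
            obtain ⟨z'', rfl⟩ := hsz
            have hz''ne : z'' ≠ [] := by
              intro h; rw [h] at hlen; simp at hlen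
            have hx : z'' <+: scanP P f (t.drop s.length) := by
              obtain ⟨r, hr⟩ := hpre
              rw [List.append_assoc] at hr
              exact ⟨r, List.append_cancel_left hr⟩
            have hnb'' : '\\' ∉ z'' := fun h => hnb (List.mem_append_right _ h)
            have hdf : (t.drop s.length).length ≤ f := by
              simp only [List.length_drop]; omega
            cases ih (t.drop s.length) z'' hdf hz''ne hnb'' hx with
            | inl h =>
              refine Or.inr (Creates.orig _ _ 0 s t (List.length_pos_of_ne_nil hz) hsP (by simp) hst
                (by simp) ?_ ?_)
              · simpa using List.length_pos_of_ne_nil hz''ne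
              · simpa using h
            | inr h =>
              refine Or.inr (Creates.deep _ _ 0 s t (List.length_pos_of_ne_nil hz) hsP (by simp) hst
                (by simp) ?_ ?_)
              · simpa using List.length_pos_of_ne_nil hz''ne
              · simpa using h
      · rw [scanP, if_neg hc] at hpre
        cases z with
        | nil => exact absurd rfl hz
        | cons z₀ z' =>
          rw [List.cons_prefix_cons] at hpre
          obtain ⟨rfl, hz'⟩ := hpre
          by_cases hz'e : z' = []
          · subst hz'e; exact Or.inl (by simp)
          · cases ih t z' (by omega) hz'e (fun hm => hnb (List.mem_cons_of_mem _ hm)) hz' with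
            | inl h => exact Or.inl (List.cons_prefix_cons.mpr ⟨rfl, h⟩)
            | inr h => exact Or.inr (creates_cons P z₀ z' t h)

def genMs (fuel : Nat) (z : List Char) (P : List (List Char)) : List (List Char) :=
  match fuel with
  | 0 => []
  | fuel + 1 =>
    (List.range z.length).flatMap (fun k =>
      P.flatMap (fun s₁ =>
        (if (z.drop k).isPrefixOf s₁ then ['\\' :: z.take k ++ '\\' :: s₁] else []) ++
        (if s₁.isPrefixOf (z.drop k) ∧ s₁.length < (z.drop k).length then
          ('\\' :: z.take k ++ '\\' :: z.drop k) ::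
          (genMs fuel ((z.drop k).drop s₁.length) P).map
            (fun m' => '\\' :: z.take k ++ '\\' :: s₁ ++ m'.tail)
         else [])))

theorem creates_gen (P : List (List Char)) (hne : ∀ s ∈ P, s ≠ []) (z v : List Char)
    (h : Creates P z v) :
    ∀ fuel, z.length ≤ fuel →
      ∃ m ∈ genMs fuel z P, m <+: ('\\' :: v) ∧ ∃ m', m = '\\' :: m' := by
  induction h with
  | stop z v k s₁ t₁ hk hs hv hpre hz =>
    intro fuel hf
    cases fuel with
    | zero => omega
    | succ g =>
      refine ⟨'\\' :: z.take k ++ '\\' :: s₁, ?_, ?_, _, rfl⟩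
      · simp only [genMs, List.mem_flatMap, List.mem_range]
        exact ⟨k, hk, s₁, hs, by
          rw [List.mem_append]
          exact Or.inl (by simp [List.isPrefixOf_iff_prefix.mpr hz])⟩
      · rw [hv]
        exact List.cons_prefix_cons.mpr ⟨rfl, (List.prefix_append_right_inj _).mpr
          (List.cons_prefix_cons.mpr ⟨rfl, hpre⟩)⟩
  | orig z v k s₁ t₁ hk hs hv hpre hz hlt hrest =>
    intro fuel hf
    cases fuel with
    | zero => omega
    | succ g =>
      refine ⟨'\\' :: z.take k ++ '\\' :: z.drop k, ?_, ?_, _, rfl⟩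
      · simp only [genMs, List.mem_flatMap, List.mem_range]
        refine ⟨k, hk, s₁, hs, ?_⟩
        rw [List.mem_append]
        refine Or.inr ?_
        rw [if_pos ⟨List.isPrefixOf_iff_prefix.mpr hz, hlt⟩]
        exact List.mem_cons_self
      · rw [hv]
        refine List.cons_prefix_cons.mpr ⟨rfl, (List.prefix_append_right_inj _).mpr
          (List.cons_prefix_cons.mpr ⟨rfl, ?_⟩)⟩
        have ht : s₁ ++ t₁.drop s₁.length = t₁ := List.prefix_iff_eq_append.mp hpre
        have hzk : s₁ ++ (z.drop k).drop s₁.length = z.drop k := List.prefix_iff_eq_append.mp hz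
        calc z.drop k = s₁ ++ (z.drop k).drop s₁.length := hzk.symm
          _ <+: s₁ ++ t₁.drop s₁.length := (List.prefix_append_right_inj s₁).mpr hrest
          _ = t₁ := ht
  | deep z v k s₁ t₁ hk hs hv hpre hz hlt hrec ih =>
    intro fuel hf
    cases fuel with
    | zero => omega
    | succ g =>
      have hs₁ne : s₁ ≠ [] := hne s₁ hs
      have hlen : ((z.drop k).drop s₁.length).length ≤ g := by
        have : 1 ≤ s₁.length := by cases s₁ <;> simp_all
        simp only [List.length_drop]; omega
      obtain ⟨m', hm'mem, hm'pre, m'', rfl⟩ := ih g hlen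
      refine ⟨'\\' :: z.take k ++ '\\' :: s₁ ++ m'', ?_, ?_, _, rfl⟩
      · simp only [genMs, List.mem_flatMap, List.mem_range]
        refine ⟨k, hk, s₁, hs, ?_⟩
        rw [List.mem_append]
        refine Or.inr ?_
        rw [if_pos ⟨List.isPrefixOf_iff_prefix.mpr hz, hlt⟩]
        refine List.mem_cons_of_mem _ ?_
        rw [List.mem_map]
        exact ⟨'\\' :: m'', hm'mem, by simp⟩
      · rw [hv]
        have hmt : m'' <+: t₁.drop s₁.length := (List.cons_prefix_cons.mp hm'pre).2
        have ht : s₁ ++ t₁.drop s₁.length = t₁ := List.prefix_iff_eq_append.mp hpre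
        have hst : s₁ ++ m'' <+: t₁ := ht ▸ (List.prefix_append_right_inj s₁).mpr hmt
        have : ('\\' : Char) :: (z.take k ++ '\\' :: (s₁ ++ m'')) <+: '\\' :: (z.take k ++ '\\' :: t₁) :=
          List.cons_prefix_cons.mpr ⟨rfl, (List.prefix_append_right_inj (z.take k)).mpr
            (List.cons_prefix_cons.mpr ⟨rfl, hst⟩)⟩
        simpa using this

set_option maxRecDepth 100000 in
theorem gen_covered : ∀ i < pvSyms.length,
    ∀ m ∈ genMs (pvSyms[i]!.length) pvSyms[i]! (pvSyms.take i), m ∈ pvMagicChars := by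
  decide
theorem syms_ne : ∀ s ∈ pvSyms, s ≠ [] := by decide
theorem syms_nobs : ∀ s ∈ pvSyms, '\\' ∉ s := by decide

theorem take_succ_syms (i : Nat) (hi : i < pvSyms.length) :
    pvSyms.take (i + 1) = pvSyms.take i ++ [pvSyms[i]!] := by
  rw [List.take_add_one]
  simp [List.getElem?_eq_getElem hi, getElem!_pos pvSyms i hi]

theorem passS (i : Nat) (hi : i < pvSyms.length) :
    ∀ (n : Nat) (cs : List Char), cs.length ≤ n → NoMagic cs →
      repAll ('\\' :: pvSyms[i]!) pvSyms[i]!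
        (scanP (pvSyms.take i) n cs).length (scanP (pvSyms.take i) n cs)
      = scanP (pvSyms.take (i + 1)) n cs := by
  set p := pvSyms[i]! with hp
  have hpmem : p ∈ pvSyms := by rw [hp]; exact getElem!_pos pvSyms i hi ▸ pvSyms.getElem_mem hi
  have hpne : p ≠ [] := syms_ne p hpmem
  have hpnobs : '\\' ∉ p := syms_nobs p hpmem
  have hpd : pvSyms[i]?.getD default = p := by
    rw [hp]; simp [List.getElem?_eq_getElem hi, getElem!_pos pvSyms i hi]
  intro n
  induction n with
  | zero =>
    intro cs h _
    have : cs = [] := by cases cs <;> simp_all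
    subst this
    simp [scanP, repAll]
  | succ n ih =>
    intro cs hlen hnm
    cases cs with
    | nil => simp [scanP, repAll]
    | cons c t =>
      simp only [List.length_cons] at hlen
      have hnmt : NoMagic t := noMagic_infix (List.suffix_cons c t).isInfix hnm
      by_cases hc : c = '\\'
      · subst hc
        cases hfind : List.find? (fun s => s.isPrefixOf t) (pvSyms.take i) with
        | some s₀ =>
          have hs₀mem : s₀ ∈ pvSyms := (List.take_prefix i pvSyms).subset (List.mem_of_find?_eq_some hfind)
          have hs₀nobs : '\\' ∉ s₀ := syms_nobs s₀ hs₀mem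
          have hfind' : List.find? (fun s => s.isPrefixOf t) (pvSyms.take (i+1)) = some s₀ := by
            rw [take_succ_syms i hi, List.find?_append, hfind]; rfl
          rw [scanP, if_pos rfl, hfind, scanP, if_pos rfl, hfind']
          have hdlen : (t.drop s₀.length).length ≤ n := by simp only [List.length_drop]; omega
          have hnmd : NoMagic (t.drop s₀.length) :=
            noMagic_infix (List.drop_suffix _ _).isInfix hnmt
          rw [repAll_append_nobs _ _ s₀ _ _ hs₀nobs le_rfl]
          rw [repAll_fuel _ _ _ _ _ le_rfl (le_refl (scanP (pvSyms.take i) n (t.drop s₀.length)).length)]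
          rw [ih (t.drop s₀.length) hdlen hnmd]
        | none =>
          by_cases hpt : p <+: t
          · have hfind' : List.find? (fun s => s.isPrefixOf t) (pvSyms.take (i+1)) = some p := by
              rw [take_succ_syms i hi, List.find?_append, hfind, Option.none_or]
              rw [List.find?_cons_of_pos (by simpa [hpd] using List.isPrefixOf_iff_prefix.mpr hpt)]
            rw [scanP, if_pos rfl, hfind, scanP, if_pos rfl, hfind']
            obtain ⟨t', rfl⟩ := hpt
            have ht'len : t'.length ≤ n := by simp at hlen; omega
            have hW : scanP (pvSyms.take i) n (p ++ t') = p ++ scanP (pvSyms.take i) n t' := by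
              rw [scanP_fuel _ _ _ (p ++ t').length (by simp at hlen ⊢; omega) le_rfl,
                scanP_append_nobs _ p _ _ hpnobs le_rfl,
                scanP_fuel _ t'.length t' n le_rfl ht'len]
            rw [hW]
            simp only [List.length_cons]
            have hmatch : ('\\' :: p).isPrefixOf ('\\' :: (p ++ scanP (pvSyms.take i) n t')) := by
              rw [List.isPrefixOf_iff_prefix]
              exact List.cons_prefix_cons.mpr ⟨rfl, List.prefix_append _ _⟩
            rw [repAll, if_pos ⟨by simp, hmatch⟩]
            simp only [List.length_cons, List.drop_succ_cons]
            rw [List.drop_left' rfl]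
            have hnmt' : NoMagic t' := noMagic_infix ⟨p, [], by simp⟩ hnmt
            rw [repAll_fuel _ _ _ _ (scanP (pvSyms.take i) n t').length (by simp) le_rfl]
            rw [ih t' ht'len hnmt']
            simp [List.drop_left' rfl]
          · have hfind' : List.find? (fun s => s.isPrefixOf t) (pvSyms.take (i+1)) = none := by
              rw [take_succ_syms i hi, List.find?_append, hfind, Option.none_or]
              rw [List.find?_cons_of_neg (by
                simp only [List.isPrefixOf_iff_prefix]
                simpa [hpd] using hpt), List.find?_nil]
            rw [scanP, if_pos rfl, hfind, scanP, if_pos rfl, hfind']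
            have hnomatch : ¬ p <+: scanP (pvSyms.take i) n t := by
              intro hW
              cases prefix_scanP (pvSyms.take i) n t p (by omega) hpne hpnobs hW with
              | inl h => exact hpt h
              | inr h =>
                obtain ⟨m, hmmem, hmpre, -⟩ :=
                  creates_gen (pvSyms.take i)
                    (fun s hs => syms_ne s ((List.take_prefix i pvSyms).subset hs)) p t h
                    p.length le_rfl
                exact hnm m (gen_covered i hi m hmmem) (hmpre.isInfix)
            simp only [List.length_cons]
            rw [repAll, if_neg (by
              rintro ⟨-, hpre⟩
              rw [List.isPrefixOf_iff_prefix, List.cons_prefix_cons] at hpre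
              exact hnomatch hpre.2)]
            exact congrArg ('\\' :: ·) (ih t (by omega) hnmt)
      · rw [scanP, if_neg hc, scanP, if_neg hc]
        have : repAll ('\\' :: p) p (c :: scanP (pvSyms.take i) n t).length
            (c :: scanP (pvSyms.take i) n t)
            = c :: repAll ('\\' :: p) p (scanP (pvSyms.take i) n t).length (scanP (pvSyms.take i) n t) := by
          have := repAll_append_nobs p p [c] (c :: scanP (pvSyms.take i) n t).length
            (scanP (pvSyms.take i) n t) (by simp; exact fun h => hc h.symm) le_rfl
          simpa using this
        rw [this, ih t (by omega) hnmt]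

-- A's guarded replace step is exactly repAll
theorem pass_eq_repAll (s l : List Char) :
    (if PySem.Chars.isIn ('\\' :: s) l then PySem.Chars.replace l ('\\' :: s) s else l)
      = repAll ('\\' :: s) s l.length l := by
  by_cases h : PySem.Chars.isIn ('\\' :: s) l = true
  · rw [if_pos h]; exact replace_eq_repAll l _ s (by simp)
  · rw [if_neg (by simpa using h)]
    exact (repAll_of_not_infix _ _ l.length l le_rfl
      (fun hinf => h ((PySem.Chars.isIn_iff_infix _ _).mpr hinf))).symm

theorem texLoop_fold (cs : List Char) (hnm : NoMagic cs) :
    ∀ d j, j + d = pvSyms.length →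
      (pvSyms.drop j).foldl
          (fun l s => if PySem.Chars.isIn ('\\' :: s) l then PySem.Chars.replace l ('\\' :: s) s else l)
          (scanP (pvSyms.take j) cs.length cs)
        = scanP pvSyms cs.length cs := by
  intro d
  induction d with
  | zero =>
    intro j hj
    simp only [Nat.add_zero] at hj
    rw [hj, List.drop_length, List.take_length]
    rfl
  | succ d ih =>
    intro j hj
    have hjlt : j < pvSyms.length := by omega
    rw [List.drop_eq_getElem_cons hjlt, List.foldl_cons, pass_eq_repAll]
    have hg : pvSyms[j] = pvSyms[j]! := (getElem!_pos pvSyms j hjlt).symm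
    rw [hg, passS j hjlt cs.length cs le_rfl hnm]
    exact ih (j + 1) (by omega)

theorem texLoop_eq_scan (cs : List Char) (hnm : NoMagic cs) :
    pvTexLoop cs = scanP pvSyms cs.length cs := by
  have h0 := texLoop_fold cs hnm pvSyms.length 0 (by omega)
  rw [List.drop_zero, List.take_zero] at h0
  rw [pvTexLoop, ← h0, scanP_nil_left cs.length cs le_rfl]

theorem scanB_false_eq : ∀ (fuel : Nat) (cs : List Char),
    pvScanB false fuel cs = scanP pvSyms fuel cs := by
  intro fuel
  induction fuel with
  | zero => intro cs; cases cs <;> simp [pvScanB, scanP]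
  | succ f ih =>
    intro cs
    cases cs with
    | nil => simp [pvScanB, scanP]
    | cons c t =>
      rw [pvScanB, scanP]
      by_cases hc : c = '\\'
      · rw [if_pos hc, if_pos hc]
        cases hfind : pvFirstSym t with
        | some s =>
          rw [pvFirstSym] at hfind; rw [hfind]
          exact congrArg (s ++ ·) (ih _)
        | none => rw [pvFirstSym] at hfind; rw [hfind]; rw [ih]
      · rw [if_neg hc, if_neg hc, if_neg (by simp), ih]

theorem filter_syms (s : List Char) (hs : s ∈ pvSyms) :
    s.filter (fun c => !(c == ' ')) = s := by
  have : ' ' ∉ s := by revert s; decide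
  exact List.filter_eq_self.mpr (fun a ha => by simp; rintro rfl; exact this ha)

theorem scanB_true_eq : ∀ (fuel : Nat) (cs : List Char),
    pvScanB true fuel cs = (scanP pvSyms fuel cs).filter (fun c => !(c == ' ')) := by
  intro fuel
  induction fuel with
  | zero => intro cs; cases cs <;> simp [pvScanB, scanP]
  | succ f ih =>
    intro cs
    cases cs with
    | nil => simp [pvScanB, scanP]
    | cons c t =>
      rw [pvScanB, scanP]
      by_cases hc : c = '\\'
      · rw [if_pos hc, if_pos hc]
        cases hfind : pvFirstSym t with
        | some s =>
          rw [pvFirstSym] at hfind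
          rw [hfind, List.filter_append, filter_syms s (List.mem_of_find?_eq_some hfind)]
          exact congrArg (s ++ ·) (ih _)
        | none =>
          rw [pvFirstSym] at hfind; rw [hfind]
          have : ('\\' : Char) ≠ ' ' := by decide
          subst hc
          simp [ih]
      · rw [if_neg hc, if_neg hc]
        by_cases hsp : c = ' '
        · rw [if_pos (by exact ⟨hsp, rfl⟩), ih, hsp]
          simp
        · rw [if_neg (by simp [hsp]), ih]
          simp [hsp]

theorem repAll_space : ∀ (fuel : Nat) (l : List Char), l.length ≤ fuel →
    repAll [' '] [] fuel l = l.filter (fun c => !(c == ' ')) := by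
  intro fuel
  induction fuel with
  | zero => intro l h; have : l = [] := by cases l <;> simp_all
            subst this; simp [repAll]
  | succ f ih =>
    intro l hf
    cases l with
    | nil => simp [repAll]
    | cons c t =>
      simp only [List.length_cons] at hf
      rw [repAll]
      by_cases hsp : c = ' '
      · rw [if_pos ⟨by simp, by simp [List.isPrefixOf, hsp]⟩]
        have hdrop : List.drop [' '].length (c :: t) = t := by simp
        rw [List.nil_append, hdrop, ih t (by omega)]
        simp [hsp]
      · rw [if_neg (by
          rintro ⟨-, hpre⟩
          rw [List.isPrefixOf_iff_prefix, List.cons_prefix_cons] at hpre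
          exact hsp hpre.1.symm)]
        rw [ih t (by omega)]
        simp [hsp]

theorem pvSliceLen (cs : List Char) (h : cs ≠ []) :
    (PySem.List.slice cs (some 1) (some (-1))).length < cs.length := by
  have : cs.length ≠ 0 := by simpa using h
  simp [PySem.List.slice]; omega

theorem slice_infix (cs : List Char) :
    PySem.List.slice cs (some 1) (some (-1)) <:+: cs := by
  simp only [PySem.List.slice]
  exact ((List.take_prefix _ _).isInfix).trans (List.drop_suffix _ _).isInfix

theorem goA_eq_goB : ∀ (fuel : Nat) (cs : List Char) (strip : Bool), cs.length ≤ fuel →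
    NoMagic cs → pvGoA fuel cs strip = pvGoB fuel cs strip := by
  intro fuel
  induction fuel with
  | zero => intro cs strip _ _; rfl
  | succ f ih =>
    intro cs strip hf hnm
    rw [pvGoA, pvGoB]
    by_cases he : cs = []
    · rw [if_pos he, if_pos he]
    · rw [if_neg he, if_neg he]
      by_cases hd : PySem.List.pyGet? cs 0 = some '$' ∧ PySem.List.pyGet? cs (-1) = some '$'
      · rw [if_pos hd, if_pos hd]
        exact ih _ true (by have := pvSliceLen cs he; omega)
          (noMagic_infix (slice_infix cs) hnm)
      · rw [if_neg hd, if_neg hd]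
        cases strip with
        | false =>
          simp only [if_neg Bool.false_ne_true]
          rw [texLoop_eq_scan cs hnm, scanB_false_eq]
        | true =>
          rw [texLoop_eq_scan cs hnm]
          show PySem.Chars.replace (scanP pvSyms cs.length cs) [' '] [] = _
          rw [replace_eq_repAll _ [' '] [] (by simp)]
          rw [repAll_space _ _ le_rfl, scanB_true_eq]

-- ========== TIGHTNESS: A ≠ B on every input inside D_ ==========
-- Strategy: count backslashes.  B's scan removes exactly one '\' per matched
-- command occurrence of the ORIGINAL string; A's replace passes remove at least
-- those and, when a cascade fragment is present, at least one more (the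
-- fragment's head backslash, removed after an earlier pass re-assembles a
-- later-listed command).  So A's output has strictly fewer backslashes.

-- number of suffixes with pat as prefix (for pat = '\'::sym these are exactly
-- Python's non-overlapping occurrence positions of pat)
def occD (pat : List Char) : List Char → Nat
  | [] => 0
  | c :: t => (if pat.isPrefixOf (c :: t) then 1 else 0) + occD pat t

def pvMsum (L : List (List Char)) (l : List Char) : Nat :=
  (L.map (fun s => occD ('\\' :: s) l)).sum

-- "pattern '\'::d can never match at a backslash of x, whatever follows x"
def xBlockedB (d : List Char) : List Char → Bool
  | [] => true
  | c :: t => (!(c == '\\') || (!(d.isPrefixOf t) && !(t.isPrefixOf d))) && xBlockedB d t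

-- A's pass cascade in repAll form
def pvFoldR (L : List (List Char)) (l : List Char) : List Char :=
  L.foldl (fun acc s => repAll ('\\' :: s) s acc.length acc) l

theorem prefix_append_cases {p a b : List Char} (h : p <+: a ++ b) : p <+: a ∨ a <+: p :=
  List.prefix_or_prefix_of_prefix h (List.prefix_append a b)

theorem occD_append_clean (p : List Char) {a : List Char} (ha : '\\' ∉ a) (b : List Char) :
    occD ('\\' :: p) (a ++ b) = occD ('\\' :: p) b := by
  induction a with
  | nil => rfl
  | cons x a' ih =>
    have hx : ¬ ('\\' :: p).isPrefixOf (x :: (a' ++ b)) := by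
      rw [List.isPrefixOf_iff_prefix]
      intro hpre
      exact ha ((List.cons_prefix_cons.mp hpre).1 ▸ List.mem_cons_self)
    rw [List.cons_append]
    show (if ('\\' :: p).isPrefixOf (x :: (a' ++ b)) then 1 else 0) + occD ('\\' :: p) (a' ++ b) = _
    rw [if_neg hx, ih (fun h => ha (List.mem_cons_of_mem _ h))]
    omega

theorem count_repAll {d : List Char} (hd : '\\' ∉ d) :
    ∀ (f : Nat) (l : List Char), l.length ≤ f →
      (repAll ('\\' :: d) d f l).count '\\' + occD ('\\' :: d) l = l.count '\\' := by
  intro f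
  induction f with
  | zero =>
    intro l h
    have : l = [] := by cases l <;> simp_all
    subst this; rfl
  | succ f ih =>
    intro l hf
    cases l with
    | nil => rfl
    | cons c t =>
      simp only [List.length_cons] at hf
      by_cases hpre : ('\\' :: d).isPrefixOf (c :: t)
      · have hc : c = '\\' := ((List.cons_prefix_cons.mp (List.isPrefixOf_iff_prefix.mp hpre)).1).symm
        have hdt : d <+: t := (List.cons_prefix_cons.mp (List.isPrefixOf_iff_prefix.mp hpre)).2
        obtain ⟨t₂, rfl⟩ := hdt
        rw [repAll, if_pos ⟨by simp, hpre⟩]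
        have hdrop : (c :: (d ++ t₂)).drop ('\\' :: d).length = t₂ := by
          simp [List.drop_append_of_le_length]
        rw [hdrop]
        have hd0 : d.count '\\' = 0 := List.count_eq_zero.mpr hd
        have ht₂ : t₂.length ≤ f := by simp at hf; omega
        have := ih t₂ ht₂
        show (d ++ repAll ('\\' :: d) d f t₂).count '\\' + occD ('\\' :: d) (c :: (d ++ t₂)) = _
        rw [List.count_append, hd0]
        show 0 + _ + ((if ('\\' :: d).isPrefixOf (c :: (d ++ t₂)) then 1 else 0) + occD ('\\' :: d) (d ++ t₂)) = _
        rw [if_pos hpre, occD_append_clean d hd t₂, hc]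
        simp only [List.count_cons, List.count_append, hd0]
        simp only [beq_self_eq_true, if_true]
        omega
      · rw [repAll, if_neg (by simp [hpre])]
        show (c :: repAll ('\\' :: d) d f t).count '\\' + occD ('\\' :: d) (c :: t) = _
        show _ + ((if ('\\' :: d).isPrefixOf (c :: t) then 1 else 0) + occD ('\\' :: d) t) = _
        rw [if_neg hpre]
        have := ih t (by omega)
        simp only [List.count_cons]
        omega

theorem pres_prefix {d p : List Char} (hp : '\\' ∉ p) :
    ∀ (f : Nat) (t : List Char), t.length ≤ f → p <+: t → p <+: repAll ('\\' :: d) d f t := by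
  induction p with
  | nil => intro f t _ _; exact List.nil_prefix
  | cons y p' ih =>
    intro f t hf hpre
    cases t with
    | nil => exact absurd (List.prefix_nil.mp hpre) (by simp)
    | cons x t' =>
      obtain ⟨rfl, hp'⟩ := List.cons_prefix_cons.mp hpre
      have hx : y ≠ '\\' := fun h => hp (h ▸ List.mem_cons_self)
      cases f with
      | zero => simp at hf
      | succ f =>
        rw [repAll, if_neg (by
          rintro ⟨-, hm⟩
          exact hx ((List.cons_prefix_cons.mp (List.isPrefixOf_iff_prefix.mp hm)).1).symm)]
        exact List.cons_prefix_cons.mpr ⟨rfl,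
          ih (fun h => hp (List.mem_cons_of_mem _ h)) f t' (by simp at hf; omega) hp'⟩

theorem mono_occD {d z : List Char} (hd : '\\' ∉ d) (hz : '\\' ∉ z)
    (hzd : ¬ z <+: d) (hdz : ¬ d <+: z) :
    ∀ (f : Nat) (l : List Char), l.length ≤ f →
      occD ('\\' :: z) l ≤ occD ('\\' :: z) (repAll ('\\' :: d) d f l) := by
  intro f
  induction f with
  | zero =>
    intro l h
    have : l = [] := by cases l <;> simp_all
    subst this; simp [repAll]
  | succ f ih =>
    intro l hf
    cases l with
    | nil => simp [repAll]
    | cons c t =>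
      simp only [List.length_cons] at hf
      by_cases hpre : ('\\' :: d).isPrefixOf (c :: t)
      · have hc : c = '\\' := ((List.cons_prefix_cons.mp (List.isPrefixOf_iff_prefix.mp hpre)).1).symm
        have hdt : d <+: t := (List.cons_prefix_cons.mp (List.isPrefixOf_iff_prefix.mp hpre)).2
        obtain ⟨t₂, rfl⟩ := hdt
        rw [repAll, if_pos ⟨by simp, hpre⟩]
        have hdrop : (c :: (d ++ t₂)).drop ('\\' :: d).length = t₂ := by
          simp [List.drop_append_of_le_length]
        rw [hdrop]
        have hbit : ¬ ('\\' :: z).isPrefixOf (c :: (d ++ t₂)) := by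
          rw [List.isPrefixOf_iff_prefix]
          intro hzp
          rcases prefix_append_cases (List.cons_prefix_cons.mp hzp).2 with h | h
          · exact hzd h
          · exact hdz h
        show (if ('\\' :: z).isPrefixOf (c :: (d ++ t₂)) then 1 else 0) + occD ('\\' :: z) (d ++ t₂) ≤ _
        rw [if_neg hbit, occD_append_clean z hd t₂, occD_append_clean z hd]
        simpa using ih t₂ (by simp at hf; omega)
      · rw [repAll, if_neg (by simp [hpre])]
        show (if ('\\' :: z).isPrefixOf (c :: t) then 1 else 0) + occD ('\\' :: z) t ≤
          (if ('\\' :: z).isPrefixOf (c :: repAll ('\\' :: d) d f t) then 1 else 0) + occD ('\\' :: z) (repAll ('\\' :: d) d f t)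
        have htail := ih t (by omega)
        by_cases hb : ('\\' :: z).isPrefixOf (c :: t)
        · have hc : c = '\\' := ((List.cons_prefix_cons.mp (List.isPrefixOf_iff_prefix.mp hb)).1).symm
          have hzt : z <+: t := (List.cons_prefix_cons.mp (List.isPrefixOf_iff_prefix.mp hb)).2
          have hb' : ('\\' :: z).isPrefixOf (c :: repAll ('\\' :: d) d f t) := by
            rw [List.isPrefixOf_iff_prefix]
            exact List.cons_prefix_cons.mpr ⟨hc.symm, pres_prefix hz f t (by omega) hzt⟩
          rw [if_pos hb, if_pos hb']
          omega
        · rw [if_neg hb]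
          split <;> omega

theorem xBlockedB_cons {d : List Char} {c : Char} {t : List Char}
    (h : xBlockedB d (c :: t) = true) :
    (c = '\\' → ¬ d <+: t ∧ ¬ t <+: d) ∧ xBlockedB d t = true := by
  rw [xBlockedB, Bool.and_eq_true, Bool.or_eq_true] at h
  refine ⟨fun hc => ?_, h.2⟩
  rcases h.1 with h1 | h1
  · simp [hc] at h1
  · rw [Bool.and_eq_true] at h1
    constructor
    · intro hp
      have := List.isPrefixOf_iff_prefix.mpr hp
      simp [this] at h1
    · intro hp
      have := List.isPrefixOf_iff_prefix.mpr hp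
      simp [this] at h1

theorem xBlockedB_clean {d x : List Char} (hx : '\\' ∉ x) : xBlockedB d x = true := by
  induction x with
  | nil => rfl
  | cons c t ih =>
    rw [xBlockedB, Bool.and_eq_true, Bool.or_eq_true]
    refine ⟨Or.inl ?_, ih (fun h => hx (List.mem_cons_of_mem _ h))⟩
    simp only [Bool.not_eq_eq_eq_not, Bool.not_true, beq_eq_false_iff_ne, ne_eq]
    exact fun h => hx (h ▸ List.mem_cons_self)

theorem walk_eq {d : List Char} :
    ∀ (x : List Char), xBlockedB d x = true →
      ∀ (f : Nat) (y : List Char), (x ++ y).length ≤ f →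
        repAll ('\\' :: d) d f (x ++ y) = x ++ repAll ('\\' :: d) d y.length y := by
  intro x
  induction x with
  | nil =>
    intro _ f y hf
    exact repAll_fuel _ _ f y y.length (by simpa using hf) le_rfl
  | cons c x' ih =>
    intro hb f y hf
    obtain ⟨hhead, htail⟩ := xBlockedB_cons hb
    cases f with
    | zero => simp at hf
    | succ f =>
      rw [List.cons_append, repAll, if_neg (by
        rintro ⟨-, hm⟩
        rw [List.isPrefixOf_iff_prefix] at hm
        obtain ⟨hc, hdrest⟩ := List.cons_prefix_cons.mp hm
        obtain ⟨h1, h2⟩ := hhead hc.symm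
        rcases prefix_append_cases hdrest with h | h
        · exact h1 h
        · exact h2 h)]
      rw [ih htail f y (by simp at hf ⊢; omega), List.cons_append]

theorem infix_drop_clean {m₀ s y : List Char} (hs : '\\' ∉ s)
    (h : ('\\' :: m₀) <:+: s ++ y) : ('\\' :: m₀) <:+: y := by
  induction s with
  | nil => simpa using h
  | cons x s' ih =>
    rw [List.cons_append, List.infix_cons_iff] at h
    rcases h with h | h
    · exact absurd ((List.cons_prefix_cons.mp h).1 ▸ List.mem_cons_self) hs
    · exact ih (fun hm => hs (List.mem_cons_of_mem _ hm)) h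

theorem repAll_match_cons {d : List Char} (r : List Char) (f : Nat) :
    repAll ('\\' :: d) d (f + 1) ('\\' :: (d ++ r)) = d ++ repAll ('\\' :: d) d f r := by
  rw [repAll, if_pos ⟨by simp, by
    rw [List.isPrefixOf_iff_prefix]
    exact List.cons_prefix_cons.mpr ⟨rfl, List.prefix_append d r⟩⟩]
  congr 1
  simp

theorem presG {s m₀ : List Char} (hs : '\\' ∉ s) (hb : xBlockedB s ('\\' :: m₀) = true) :
    ∀ (f : Nat) (l : List Char), l.length ≤ f → ('\\' :: m₀) <:+: l →
      ('\\' :: m₀) <:+: repAll ('\\' :: s) s f l := by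
  intro f
  induction f with
  | zero =>
    intro l hf hm
    have : l = [] := by cases l <;> simp_all
    subst this
    simp at hm
  | succ f ih =>
    intro l hf hm
    by_cases hh : ('\\' :: m₀) <+: l
    · obtain ⟨r, rfl⟩ := hh
      rw [walk_eq ('\\' :: m₀) hb (f + 1) r hf]
      exact ⟨[], repAll ('\\' :: s) s r.length r, by simp⟩
    · cases l with
      | nil => simp at hm
      | cons c t =>
        simp only [List.length_cons] at hf
        have hmt : ('\\' :: m₀) <:+: t := by
          rcases (List.infix_cons_iff).mp hm with h | h
          · exact absurd h hh
          · exact h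
        by_cases hpre : ('\\' :: s).isPrefixOf (c :: t)
        · have hst : s <+: t := (List.cons_prefix_cons.mp (List.isPrefixOf_iff_prefix.mp hpre)).2
          obtain ⟨t₂, rfl⟩ := hst
          rw [repAll, if_pos ⟨by simp, hpre⟩]
          have hdrop : (c :: (s ++ t₂)).drop ('\\' :: s).length = t₂ := by simp
          rw [hdrop]
          have h₂ : ('\\' :: m₀) <:+: t₂ := infix_drop_clean hs hmt
          exact (ih t₂ (by simp only [List.length_append] at hf; omega) h₂).trans
            (List.suffix_append s _).isInfix
        · rw [repAll, if_neg (by simp [hpre])]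
          exact (ih t (by omega) hmt).trans (List.suffix_cons c _).isInfix

theorem transform {d x₀ : List Char} (hd : '\\' ∉ d) (hb : xBlockedB d ('\\' :: x₀) = true) :
    ∀ (f : Nat) (l : List Char), l.length ≤ f → (('\\' :: x₀) ++ '\\' :: d) <:+: l →
      (('\\' :: x₀) ++ d) <:+: repAll ('\\' :: d) d f l := by
  intro f
  induction f with
  | zero =>
    intro l hf hm
    have : l = [] := by cases l <;> simp_all
    subst this
    simp at hm
  | succ f ih =>
    intro l hf hm
    by_cases hh : (('\\' :: x₀) ++ '\\' :: d) <+: l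
    · obtain ⟨r, hr⟩ := hh
      rw [List.append_assoc] at hr
      subst hr
      rw [walk_eq ('\\' :: x₀) hb (f + 1) ('\\' :: d ++ r) (by simpa using hf)]
      rw [show ('\\' :: d ++ r : List Char) = '\\' :: (d ++ r) from rfl,
        show ('\\' :: (d ++ r)).length = (d ++ r).length + 1 by simp,
        repAll_match_cons]
      exact ⟨[], repAll ('\\' :: d) d (d ++ r).length r, by simp⟩
    · cases l with
      | nil => simp at hm
      | cons c t =>
        simp only [List.length_cons] at hf
        have hmt : (('\\' :: x₀) ++ '\\' :: d) <:+: t := by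
          rcases (List.infix_cons_iff).mp hm with h | h
          · exact absurd h hh
          · exact h
        by_cases hpre : ('\\' :: d).isPrefixOf (c :: t)
        · have hst : d <+: t := (List.cons_prefix_cons.mp (List.isPrefixOf_iff_prefix.mp hpre)).2
          obtain ⟨t₂, rfl⟩ := hst
          rw [repAll, if_pos ⟨by simp, hpre⟩]
          have hdrop : (c :: (d ++ t₂)).drop ('\\' :: d).length = t₂ := by simp
          rw [hdrop]
          have h₂ : (('\\' :: x₀) ++ '\\' :: d) <:+: t₂ := by
            have : ((('\\' :: x₀) ++ '\\' :: d) : List Char) = '\\' :: (x₀ ++ '\\' :: d) := by simp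
            rw [this] at hmt ⊢
            exact infix_drop_clean hd hmt
          exact (ih t₂ (by simp only [List.length_append] at hf; omega) h₂).trans
            (List.suffix_append d _).isInfix
        · rw [repAll, if_neg (by simp [hpre])]
          exact (ih t (by omega) hmt).trans (List.suffix_cons c _).isInfix

theorem create_count {a d e z : List Char}
    (hca : '\\' ∉ a) (hcd : '\\' ∉ d) (hce : '\\' ∉ e) (hcz : '\\' ∉ z)
    (hda1 : ¬ d <+: a) (hda2 : ¬ a <+: d) (hzd1 : ¬ z <+: d) (hzd2 : ¬ d <+: z)
    (hza : ¬ z <+: a) (hz2 : z <+: a ++ (d ++ e))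
    (hz51 : ¬ z <+: d ++ e) (hz52 : ¬ (d ++ e) <+: z) :
    ∀ (f : Nat) (l : List Char), l.length ≤ f →
      (('\\' :: a) ++ '\\' :: (d ++ e)) <:+: l →
      occD ('\\' :: z) l + 1 ≤ occD ('\\' :: z) (repAll ('\\' :: d) d f l) := by
  have hcde : '\\' ∉ d ++ e := by
    intro h; rcases List.mem_append.mp h with h | h
    exacts [hcd h, hce h]
  intro f
  induction f with
  | zero =>
    intro l hf hm
    have : l = [] := by cases l <;> simp_all
    subst this
    simp at hm
  | succ f ih =>
    intro l hf hm
    by_cases hh : (('\\' :: a) ++ '\\' :: (d ++ e)) <+: l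
    · -- fragment at the head: the pass assembles ''++z there
      obtain ⟨r, hr⟩ := hh
      rw [List.append_assoc] at hr
      subst hr
      -- left side: the fragment region contributes nothing to occD_z
      have hLbit0 : ¬ ('\\' :: z).isPrefixOf (('\\' :: a) ++ ('\\' :: (d ++ e) ++ r)) := by
        rw [List.isPrefixOf_iff_prefix, List.cons_append, List.cons_prefix_cons]
        rintro ⟨-, hzp⟩
        rcases prefix_append_cases hzp with h | h
        · exact hza h
        · obtain ⟨ζ, rfl⟩ := h
          cases ζ with
          | nil => exact hza (by simpa using List.prefix_refl a)
          | cons zc ζ' =>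
            have : zc = '\\' := by
              have := (List.prefix_append_right_inj a).mp hzp
              exact (List.cons_prefix_cons.mp this).1
            exact hcz (by simp [this])
      have hLbit1 : ¬ ('\\' :: z).isPrefixOf ('\\' :: ((d ++ e) ++ r)) := by
        rw [List.isPrefixOf_iff_prefix, List.cons_prefix_cons]
        rintro ⟨-, hzp⟩
        rcases prefix_append_cases hzp with h | h
        · exact hz51 h
        · exact hz52 h
      have hL : occD ('\\' :: z) (('\\' :: a) ++ ('\\' :: (d ++ e) ++ r)) = occD ('\\' :: z) r := by
        rw [List.cons_append]
        simp only [occD]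
        rw [if_neg (by simpa using hLbit0), occD_append_clean z hca]
        rw [show (('\\' :: (d ++ e) ++ r) : List Char) = '\\' :: ((d ++ e) ++ r) from rfl]
        simp only [occD]
        rw [if_neg hLbit1, occD_append_clean z hcde r]
        omega
      -- right side: run the pass over the fragment region
      have hxb : xBlockedB d ('\\' :: a) = true := by
        rw [xBlockedB, Bool.and_eq_true, Bool.or_eq_true]
        refine ⟨Or.inr ?_, xBlockedB_clean hca⟩
        rw [Bool.and_eq_true]
        have h1 : d.isPrefixOf a = false := by
          cases hip : d.isPrefixOf a with
          | false => rfl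
          | true => exact absurd (List.isPrefixOf_iff_prefix.mp hip) hda1
        have h2 : a.isPrefixOf d = false := by
          cases hip : a.isPrefixOf d with
          | false => rfl
          | true => exact absurd (List.isPrefixOf_iff_prefix.mp hip) hda2
        rw [h1, h2]
        exact ⟨rfl, rfl⟩
      have hR : repAll ('\\' :: d) d (f + 1) (('\\' :: a) ++ ('\\' :: (d ++ e) ++ r))
          = ('\\' :: a) ++ (d ++ (e ++ repAll ('\\' :: d) d r.length r)) := by
        rw [walk_eq ('\\' :: a) hxb (f + 1) ('\\' :: (d ++ e) ++ r) hf]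
        congr 1
        rw [show (('\\' :: (d ++ e) ++ r) : List Char) = '\\' :: (d ++ (e ++ r)) by simp,
          show ('\\' :: (d ++ (e ++ r))).length = (d ++ (e ++ r)).length + 1 by simp,
          repAll_match_cons]
        congr 1
        exact walk_eq e (xBlockedB_clean hce) (d ++ (e ++ r)).length r (by simp)
      rw [hR, hL]
      have hbit1 : ('\\' :: z).isPrefixOf (('\\' :: a) ++ (d ++ (e ++ repAll ('\\' :: d) d r.length r))) := by
        rw [List.isPrefixOf_iff_prefix, List.cons_append, List.cons_prefix_cons]
        refine ⟨rfl, ?_⟩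
        calc z <+: a ++ (d ++ e) := hz2
          _ <+: a ++ (d ++ (e ++ repAll ('\\' :: d) d r.length r)) := by
            rw [show (a ++ (d ++ (e ++ repAll ('\\' :: d) d r.length r)) : List Char)
              = (a ++ (d ++ e)) ++ repAll ('\\' :: d) d r.length r by simp]
            exact List.prefix_append _ _
      have hocc : occD ('\\' :: z) (('\\' :: a) ++ (d ++ (e ++ repAll ('\\' :: d) d r.length r)))
          = 1 + occD ('\\' :: z) (repAll ('\\' :: d) d r.length r) := by
        rw [List.cons_append]
        show (if _ then 1 else 0) + occD ('\\' :: z) (a ++ (d ++ (e ++ _))) = _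
        rw [if_pos (by simpa using hbit1), occD_append_clean z hca, occD_append_clean z hcd,
          occD_append_clean z hce]
      rw [hocc]
      have := mono_occD hcd hcz hzd1 hzd2 r.length r le_rfl
      omega
    · cases l with
      | nil => simp at hm
      | cons c t =>
        simp only [List.length_cons] at hf
        have hmt : (('\\' :: a) ++ '\\' :: (d ++ e)) <:+: t := by
          rcases (List.infix_cons_iff).mp hm with h | h
          · exact absurd h hh
          · exact h
        by_cases hpre : ('\\' :: d).isPrefixOf (c :: t)
        · have hc : c = '\\' := ((List.cons_prefix_cons.mp (List.isPrefixOf_iff_prefix.mp hpre)).1).symm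
          have hdt : d <+: t := (List.cons_prefix_cons.mp (List.isPrefixOf_iff_prefix.mp hpre)).2
          obtain ⟨t₂, rfl⟩ := hdt
          rw [repAll, if_pos ⟨by simp, hpre⟩]
          have hdrop : (c :: (d ++ t₂)).drop ('\\' :: d).length = t₂ := by simp
          rw [hdrop]
          have h₂ : (('\\' :: a) ++ '\\' :: (d ++ e)) <:+: t₂ := by
            have hsh : ((('\\' :: a) ++ '\\' :: (d ++ e)) : List Char)
              = '\\' :: (a ++ '\\' :: (d ++ e)) := by simp
            rw [hsh] at hmt ⊢
            exact infix_drop_clean hcd hmt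
          have hbit0 : ¬ ('\\' :: z).isPrefixOf (c :: (d ++ t₂)) := by
            rw [List.isPrefixOf_iff_prefix, List.cons_prefix_cons]
            rintro ⟨-, hzp⟩
            rcases prefix_append_cases hzp with h | h
            · exact hzd1 h
            · exact hzd2 h
          show (if _ then 1 else 0) + occD ('\\' :: z) (d ++ t₂) + 1 ≤ _
          rw [if_neg hbit0, occD_append_clean z hcd t₂, occD_append_clean z hcd]
          have := ih t₂ (by simp only [List.length_append] at hf; omega) h₂
          omega
        · rw [repAll, if_neg (by simp [hpre])]
          have htail := ih t (by omega) hmt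
          show (if ('\\' :: z).isPrefixOf (c :: t) then 1 else 0) + occD ('\\' :: z) t + 1 ≤
            (if ('\\' :: z).isPrefixOf (c :: repAll ('\\' :: d) d f t) then 1 else 0)
              + occD ('\\' :: z) (repAll ('\\' :: d) d f t)
          by_cases hb : ('\\' :: z).isPrefixOf (c :: t)
          · have hc : c = '\\' := ((List.cons_prefix_cons.mp (List.isPrefixOf_iff_prefix.mp hb)).1).symm
            have hzt : z <+: t := (List.cons_prefix_cons.mp (List.isPrefixOf_iff_prefix.mp hb)).2
            have hb' : ('\\' :: z).isPrefixOf (c :: repAll ('\\' :: d) d f t) := by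
              rw [List.isPrefixOf_iff_prefix]
              exact List.cons_prefix_cons.mpr ⟨hc.symm, pres_prefix hcz f t (by omega) hzt⟩
            rw [if_pos hb, if_pos hb']
            omega
          · rw [if_neg hb]
            split <;> omega

theorem pvMsum_nil (L : List (List Char)) : pvMsum L [] = 0 := by
  induction L with
  | nil => rfl
  | cons s L ih => simp_all [pvMsum, occD]

theorem pvMsum_cons (L : List (List Char)) (c : Char) (t : List Char) :
    pvMsum L (c :: t) =
      (L.map (fun s => if ('\\' :: s).isPrefixOf (c :: t) then 1 else 0)).sum + pvMsum L t := by
  induction L with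
  | nil => rfl
  | cons σ L ih =>
    simp only [pvMsum, List.map_cons, List.sum_cons] at ih ⊢
    show occD ('\\' :: σ) (c :: t) + _ = _
    rw [show occD ('\\' :: σ) (c :: t)
      = (if ('\\' :: σ).isPrefixOf (c :: t) then 1 else 0) + occD ('\\' :: σ) t from rfl, ih]
    omega

theorem pvMsum_append_clean (L : List (List Char)) {s : List Char} (hs : '\\' ∉ s)
    (t : List Char) : pvMsum L (s ++ t) = pvMsum L t := by
  induction L with
  | nil => rfl
  | cons σ L ih =>
    simp only [pvMsum, List.map_cons, List.sum_cons] at ih ⊢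
    rw [occD_append_clean σ hs, ih]

theorem sum_map_ite_unique {L : List (List Char)} (hnd : L.Nodup) {s : List Char}
    (hs : s ∈ L) (Q : List Char → Bool) (hQs : Q s = true)
    (huniq : ∀ σ ∈ L, Q σ = true → σ = s) :
    (L.map (fun σ => if Q σ = true then 1 else 0)).sum = 1 := by
  induction L with
  | nil => simp at hs
  | cons x L ih =>
    simp only [List.map_cons, List.sum_cons]
    rcases List.mem_cons.mp hs with rfl | hsL
    · rw [if_pos hQs]
      have hzero : ∀ σ ∈ L, Q σ = false := by
        intro σ hσ
        cases hq : Q σ with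
        | false => rfl
        | true =>
          have := huniq σ (List.mem_cons_of_mem _ hσ) hq
          subst this
          exact absurd hσ (List.nodup_cons.mp hnd).1
      have : (L.map (fun σ => if Q σ = true then 1 else 0)).sum = 0 := by
        apply List.sum_eq_zero
        intro n hn
        obtain ⟨σ, hσ, rfl⟩ := List.mem_map.mp hn
        rw [hzero σ hσ]
        rfl
      omega
    · have hx : Q x = false := by
        cases hq : Q x with
        | false => rfl
        | true =>
          have := huniq x List.mem_cons_self hq
          subst this
          exact absurd hsL (List.nodup_cons.mp hnd).1
      rw [hx]
      have := ih (List.nodup_cons.mp hnd).2 hsL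
        (fun σ hσ => huniq σ (List.mem_cons_of_mem _ hσ))
      simpa using this

theorem pvSyms_nodup : pvSyms.Nodup := by decide

theorem pvSyms_pairwise : pvSyms.Pairwise
    (fun s t => s.isPrefixOf t = false ∧ t.isPrefixOf s = false) := by decide

theorem pvSyms_uniq : ∀ t : List Char, ∀ s ∈ pvSyms, s.isPrefixOf t = true →
    ∀ σ ∈ pvSyms, σ.isPrefixOf t = true → σ = s := by
  intro t s hs hst σ hσ hσt
  by_contra hne
  have hR := pvSyms_pairwise.forall (fun a b hab => ⟨hab.2, hab.1⟩) hσ hs hne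
  rcases List.prefix_or_prefix_of_prefix (List.isPrefixOf_iff_prefix.mp hσt)
    (List.isPrefixOf_iff_prefix.mp hst) with h | h
  · have := List.isPrefixOf_iff_prefix.mpr h
    rw [hR.1] at this
    exact absurd this (by simp)
  · have := List.isPrefixOf_iff_prefix.mpr h
    rw [hR.2] at this
    exact absurd this (by simp)

theorem count_scanP :
    ∀ (f : Nat) (l : List Char), l.length ≤ f →
      (scanP pvSyms f l).count '\\' + pvMsum pvSyms l = l.count '\\' := by
  intro f
  induction f with
  | zero =>
    intro l h
    have : l = [] := by cases l <;> simp_all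
    subst this
    simp [scanP, pvMsum_nil]
  | succ f ih =>
    intro l hf
    cases l with
    | nil => simp [scanP, pvMsum_nil]
    | cons c t =>
      simp only [List.length_cons] at hf
      rw [pvMsum_cons]
      by_cases hc : c = '\\'
      · subst hc
        cases hfind : List.find? (fun s => s.isPrefixOf t) pvSyms with
        | some s =>
          have hsP : s ∈ pvSyms := List.mem_of_find?_eq_some hfind
          have hsp : s.isPrefixOf t = true := by simpa using List.find?_some hfind
          have hclean : '\\' ∉ s := syms_nobs s hsP
          obtain ⟨t₂, rfl⟩ := List.isPrefixOf_iff_prefix.mp hsp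
          rw [scanP, if_pos rfl, hfind]
          have hbits : (pvSyms.map (fun σ => if ('\\' :: σ).isPrefixOf ('\\' :: (s ++ t₂)) then 1 else 0)).sum = 1 := by
            have hconv : ∀ σ : List Char, ('\\' :: σ).isPrefixOf ('\\' :: (s ++ t₂)) = σ.isPrefixOf (s ++ t₂) := by
              intro σ
              cases hq : σ.isPrefixOf (s ++ t₂) with
              | true =>
                rw [List.isPrefixOf_iff_prefix]
                exact List.cons_prefix_cons.mpr ⟨rfl, List.isPrefixOf_iff_prefix.mp hq⟩
              | false =>
                cases hq2 : ('\\' :: σ).isPrefixOf ('\\' :: (s ++ t₂)) with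
                | false => rfl
                | true =>
                  have := (List.cons_prefix_cons.mp (List.isPrefixOf_iff_prefix.mp hq2)).2
                  rw [List.isPrefixOf_iff_prefix.mpr this] at hq
                  exact hq
            have hsp2 : s.isPrefixOf (s ++ t₂) = true :=
              List.isPrefixOf_iff_prefix.mpr (List.prefix_append s t₂)
            have hmapeq : pvSyms.map (fun σ => if ('\\' :: σ).isPrefixOf ('\\' :: (s ++ t₂)) then 1 else 0)
                = pvSyms.map (fun σ => if σ.isPrefixOf (s ++ t₂) = true then 1 else 0) :=
              List.map_congr_left (fun σ _ => by rw [hconv σ])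
            rw [hmapeq]
            exact sum_map_ite_unique pvSyms_nodup hsP _ hsp2
              (fun σ hσ hq => pvSyms_uniq (s ++ t₂) s hsP hsp2 σ hσ hq)
          rw [hbits]
          show (s ++ scanP pvSyms f ((s ++ t₂).drop s.length)).count '\\'
              + (1 + pvMsum pvSyms (s ++ t₂)) = List.count '\\' ('\\' :: (s ++ t₂))
          have hdrop : (s ++ t₂).drop s.length = t₂ := by simp
          rw [hdrop]
          have hlt₂ : t₂.length ≤ f := by simp only [List.length_append] at hf; omega
          have := ih t₂ hlt₂
          rw [List.count_append, List.count_eq_zero.mpr hclean,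
            pvMsum_append_clean pvSyms hclean]
          simp only [List.count_cons, List.count_append, List.count_eq_zero.mpr hclean]
          simp only [beq_self_eq_true, if_true]
          omega
        | none =>
          rw [scanP, if_pos rfl, hfind]
          have hbits : (pvSyms.map (fun σ => if ('\\' :: σ).isPrefixOf ('\\' :: t) then 1 else 0)).sum = 0 := by
            apply List.sum_eq_zero
            intro n hn
            obtain ⟨σ, hσ, rfl⟩ := List.mem_map.mp hn
            have := List.find?_eq_none.mp hfind σ hσ
            rw [if_neg (by
              intro hq
              exact this (by
                simpa using (List.isPrefixOf_iff_prefix.mpr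
                  (List.cons_prefix_cons.mp (List.isPrefixOf_iff_prefix.mp hq)).2)))]
          rw [hbits]
          show ('\\' :: scanP pvSyms f t).count '\\' + (0 + pvMsum pvSyms t)
              = List.count '\\' ('\\' :: t)
          have := ih t (by omega)
          simp only [List.count_cons, beq_self_eq_true, if_true]
          omega
      · rw [scanP, if_neg hc]
        have hbits : (pvSyms.map (fun σ => if ('\\' :: σ).isPrefixOf (c :: t) then 1 else 0)).sum = 0 := by
          apply List.sum_eq_zero
          intro n hn
          obtain ⟨σ, hσ, rfl⟩ := List.mem_map.mp hn
          rw [if_neg (by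
            intro hq
            exact hc ((List.cons_prefix_cons.mp (List.isPrefixOf_iff_prefix.mp hq)).1).symm)]
        rw [hbits]
        have := ih t (by omega)
        simp only [List.count_cons]
        omega

theorem texLoop_eq_foldR (cs : List Char) : pvTexLoop cs = pvFoldR pvSyms cs := by
  rw [pvTexLoop, pvFoldR]
  apply List.foldl_ext
  intro l s _
  exact pass_eq_repAll s l

-- ledger: the pass cascade removes at least one backslash per original match
theorem msum_mono_one {M : List (List Char)} {d : List Char} (hd : '\\' ∉ d)
    (h : ∀ σ ∈ M, '\\' ∉ σ ∧ ¬ σ <+: d ∧ ¬ d <+: σ) (f : Nat) (l : List Char)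
    (hf : l.length ≤ f) :
    pvMsum M l ≤ pvMsum M (repAll ('\\' :: d) d f l) := by
  induction M with
  | nil => simp [pvMsum]
  | cons σ M ih =>
    obtain ⟨hσc, hσ1, hσ2⟩ := h σ List.mem_cons_self
    have h1 := mono_occD hd hσc hσ1 hσ2 f l hf
    have h2 := ih (fun τ hτ => h τ (List.mem_cons_of_mem _ hτ))
    simp only [pvMsum, List.map_cons, List.sum_cons] at h2 ⊢
    omega

theorem ledger {L : List (List Char)} (hclean : ∀ s ∈ L, '\\' ∉ s)
    (hpf : L.Pairwise (fun s t => ¬ s <+: t ∧ ¬ t <+: s)) (l : List Char) :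
    (pvFoldR L l).count '\\' + pvMsum L l ≤ l.count '\\' := by
  induction L generalizing l with
  | nil => simp [pvFoldR, pvMsum]
  | cons s₀ L ih =>
    have hs₀ : '\\' ∉ s₀ := hclean s₀ List.mem_cons_self
    have hstep : pvFoldR (s₀ :: L) l = pvFoldR L (repAll ('\\' :: s₀) s₀ l.length l) := rfl
    rw [hstep]
    have h1 := ih (fun s hs => hclean s (List.mem_cons_of_mem _ hs))
      (List.pairwise_cons.mp hpf).2 (repAll ('\\' :: s₀) s₀ l.length l)
    have h2 := count_repAll hs₀ l.length l le_rfl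
    have h3 : pvMsum L l ≤ pvMsum L (repAll ('\\' :: s₀) s₀ l.length l) := by
      apply msum_mono_one hs₀ _ l.length l le_rfl
      intro σ hσ
      have := (List.pairwise_cons.mp hpf).1 σ hσ
      exact ⟨hclean σ (List.mem_cons_of_mem _ hσ), this.2, this.1⟩
    simp only [pvMsum, List.map_cons, List.sum_cons] at h1 h3 ⊢
    omega

theorem foldR_mono_occD {z : List Char} (hz : '\\' ∉ z) {L : List (List Char)}
    (h : ∀ s ∈ L, '\\' ∉ s ∧ ¬ z <+: s ∧ ¬ s <+: z) (l : List Char) :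
    occD ('\\' :: z) l ≤ occD ('\\' :: z) (pvFoldR L l) := by
  induction L generalizing l with
  | nil => simp [pvFoldR]
  | cons s₀ L ih =>
    obtain ⟨hc, h1, h2⟩ := h s₀ List.mem_cons_self
    calc occD ('\\' :: z) l ≤ occD ('\\' :: z) (repAll ('\\' :: s₀) s₀ l.length l) :=
          mono_occD hc hz h1 h2 l.length l le_rfl
      _ ≤ _ := ih (fun s hs => h s (List.mem_cons_of_mem _ hs)) _

theorem foldR_msum_mono {M L : List (List Char)}
    (hcl : ∀ s ∈ L, '\\' ∉ s)
    (hMcl : ∀ σ ∈ M, '\\' ∉ σ)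
    (h : ∀ σ ∈ M, ∀ s ∈ L, ¬ σ <+: s ∧ ¬ s <+: σ) (l : List Char) :
    pvMsum M l ≤ pvMsum M (pvFoldR L l) := by
  induction L generalizing l with
  | nil => simp [pvFoldR]
  | cons s₀ L ih =>
    have hs₀ : '\\' ∉ s₀ := hcl s₀ List.mem_cons_self
    calc pvMsum M l ≤ pvMsum M (repAll ('\\' :: s₀) s₀ l.length l) := by
          apply msum_mono_one hs₀ _ l.length l le_rfl
          intro σ hσ
          exact ⟨hMcl σ hσ, (h σ hσ s₀ List.mem_cons_self).1, (h σ hσ s₀ List.mem_cons_self).2⟩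
      _ ≤ _ := ih (fun s hs => hcl s (List.mem_cons_of_mem _ hs))
          (fun σ hσ s hs => h σ hσ s (List.mem_cons_of_mem _ hs)) _

theorem foldR_pres {m₀ : List Char} {L : List (List Char)}
    (h : ∀ s ∈ L, '\\' ∉ s ∧ xBlockedB s ('\\' :: m₀) = true) (l : List Char)
    (hm : ('\\' :: m₀) <:+: l) : ('\\' :: m₀) <:+: pvFoldR L l := by
  induction L generalizing l with
  | nil => simpa [pvFoldR] using hm
  | cons s₀ L ih =>
    obtain ⟨hc, hb⟩ := h s₀ List.mem_cons_self
    exact ih (fun s hs => h s (List.mem_cons_of_mem _ hs)) _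
      (presG hc hb l.length l le_rfl hm)

-- the master inequality, instantiated for each of the 41 two-backslash fragments
theorem master (a d e z : List Char) (S₁ S₂ S₃ : List (List Char))
    (hsplit : pvSyms = S₁ ++ d :: (S₂ ++ z :: S₃))
    (hca : '\\' ∉ a) (hce : '\\' ∉ e)
    (hda1 : ¬ d <+: a) (hda2 : ¬ a <+: d)
    (hza : ¬ z <+: a) (hz2 : z <+: a ++ (d ++ e))
    (hz51 : ¬ z <+: d ++ e) (hz52 : ¬ (d ++ e) <+: z)
    (hS₁ : ∀ s ∈ S₁, xBlockedB s (('\\' :: a) ++ '\\' :: (d ++ e)) = true) :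
    ∀ cs, (('\\' :: a) ++ '\\' :: (d ++ e)) <:+: cs →
      (pvTexLoop cs).count '\\' + 1 ≤ (scanP pvSyms cs.length cs).count '\\' := by
  intro cs hm
  -- membership and cleanliness facts from the split
  have hdP : d ∈ pvSyms := by rw [hsplit]; simp
  have hzP : z ∈ pvSyms := by rw [hsplit]; simp
  have hcd : '\\' ∉ d := syms_nobs d hdP
  have hcz : '\\' ∉ z := syms_nobs z hzP
  have hS₁P : ∀ s ∈ S₁, s ∈ pvSyms := by intro s hs; rw [hsplit]; simp [hs]
  have hS₂P : ∀ s ∈ S₂, s ∈ pvSyms := by intro s hs; rw [hsplit]; simp [hs]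
  have hS₃P : ∀ s ∈ S₃, s ∈ pvSyms := by intro s hs; rw [hsplit]; simp [hs]
  -- pairwise incomparability along the split
  have hpw : (S₁ ++ d :: (S₂ ++ z :: S₃)).Pairwise
      (fun s t => ¬ s <+: t ∧ ¬ t <+: s) := by
    rw [← hsplit]
    refine pvSyms_pairwise.imp ?_
    intro s t hst
    constructor
    · intro hp
      have := List.isPrefixOf_iff_prefix.mpr hp
      rw [hst.1] at this
      exact absurd this (by simp)
    · intro hp
      have := List.isPrefixOf_iff_prefix.mpr hp
      rw [hst.2] at this
      exact absurd this (by simp)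
  rw [List.pairwise_append] at hpw
  obtain ⟨hpwS₁, hpwR, hcross₁⟩ := hpw
  rw [List.pairwise_cons] at hpwR
  obtain ⟨hdR, hpwR⟩ := hpwR
  rw [List.pairwise_append] at hpwR
  obtain ⟨hpwS₂, hpwZ, hcross₂⟩ := hpwR
  rw [List.pairwise_cons] at hpwZ
  obtain ⟨hzS₃, hpwS₃⟩ := hpwZ
  have hzd1 : ¬ z <+: d := (hdR z (by simp)).2
  have hzd2 : ¬ d <+: z := (hdR z (by simp)).1
  -- decompose the fold
  have hfold : pvFoldR pvSyms cs
      = pvFoldR S₃ (pvFoldR [z] (pvFoldR S₂ (pvFoldR [d] (pvFoldR S₁ cs)))) := by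
    rw [hsplit]
    simp only [pvFoldR, List.foldl_append, List.foldl_cons, List.foldl_nil]
  rw [texLoop_eq_foldR, hfold]
  set l₁ := pvFoldR S₁ cs with hl₁
  set l₂ := pvFoldR [d] l₁ with hl₂
  set l₃ := pvFoldR S₂ l₂ with hl₃
  set l₄ := pvFoldR [z] l₃ with hl₄
  have hl₂' : l₂ = repAll ('\\' :: d) d l₁.length l₁ := rfl
  have hl₄' : l₄ = repAll ('\\' :: z) z l₃.length l₃ := rfl
  -- ledgers
  have c5 : l₁.count '\\' + pvMsum S₁ cs ≤ cs.count '\\' := by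
    rw [hl₁]; exact ledger (fun s hs => syms_nobs s (hS₁P s hs)) hpwS₁ cs
  have c4 : l₂.count '\\' + occD ('\\' :: d) l₁ = l₁.count '\\' := by
    rw [hl₂']; exact count_repAll hcd l₁.length l₁ le_rfl
  have c3 : l₃.count '\\' + pvMsum S₂ l₂ ≤ l₂.count '\\' := by
    rw [hl₃]; exact ledger (fun s hs => syms_nobs s (hS₂P s hs)) hpwS₂ l₂
  have c2 : l₄.count '\\' + occD ('\\' :: z) l₃ = l₃.count '\\' := by
    rw [hl₄']; exact count_repAll hcz l₃.length l₃ le_rfl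
  have c1 : (pvFoldR S₃ l₄).count '\\' + pvMsum S₃ l₄ ≤ l₄.count '\\' :=
    ledger (fun s hs => syms_nobs s (hS₃P s hs)) hpwS₃ l₄
  -- monotonicity chains back to cs
  have m3 : occD ('\\' :: d) cs ≤ occD ('\\' :: d) l₁ :=
    foldR_mono_occD hcd (fun s hs =>
      ⟨syms_nobs s (hS₁P s hs),
       (hcross₁ s hs d (by simp)).2, (hcross₁ s hs d (by simp)).1⟩) cs
  have mfrag : (('\\' :: a) ++ '\\' :: (d ++ e)) <:+: l₁ := by
    have hsh : ((('\\' :: a) ++ '\\' :: (d ++ e)) : List Char)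
      = '\\' :: (a ++ '\\' :: (d ++ e)) := by simp
    rw [hsh] at hm ⊢
    exact foldR_pres (fun s hs =>
      ⟨syms_nobs s (hS₁P s hs), by
        have := hS₁ s hs
        rwa [hsh] at this⟩) cs hm
  have m4a : occD ('\\' :: z) cs ≤ occD ('\\' :: z) l₁ :=
    foldR_mono_occD hcz (fun s hs =>
      ⟨syms_nobs s (hS₁P s hs),
       (hcross₁ s hs z (by simp)).2, (hcross₁ s hs z (by simp)).1⟩) cs
  have m4b : occD ('\\' :: z) l₁ + 1 ≤ occD ('\\' :: z) l₂ := by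
    rw [hl₂']
    exact create_count hca hcd hce hcz hda1 hda2 hzd1 hzd2 hza hz2 hz51 hz52
      l₁.length l₁ le_rfl mfrag
  have m4c : occD ('\\' :: z) l₂ ≤ occD ('\\' :: z) l₃ :=
    foldR_mono_occD hcz (fun s hs =>
      ⟨syms_nobs s (hS₂P s hs),
       (hcross₂ s hs z (by simp)).2, (hcross₂ s hs z (by simp)).1⟩) l₂
  have m2 : pvMsum S₂ cs ≤ pvMsum S₂ l₂ := by
    have step1 : pvMsum S₂ cs ≤ pvMsum S₂ l₁ :=
      foldR_msum_mono (fun s hs => syms_nobs s (hS₁P s hs))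
        (fun σ hσ => syms_nobs σ (hS₂P σ hσ))
        (fun σ hσ s hs =>
          ⟨(hcross₁ s hs σ (by simp [hσ])).2, (hcross₁ s hs σ (by simp [hσ])).1⟩) cs
    have step2 : pvMsum S₂ l₁ ≤ pvMsum S₂ l₂ := by
      rw [hl₂']
      apply msum_mono_one hcd _ l₁.length l₁ le_rfl
      intro σ hσ
      exact ⟨syms_nobs σ (hS₂P σ hσ), (hdR σ (by simp [hσ])).2, (hdR σ (by simp [hσ])).1⟩
    omega
  have m1 : pvMsum S₃ cs ≤ pvMsum S₃ l₄ := by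
    have step1 : pvMsum S₃ cs ≤ pvMsum S₃ l₁ :=
      foldR_msum_mono (fun s hs => syms_nobs s (hS₁P s hs))
        (fun σ hσ => syms_nobs σ (hS₃P σ hσ))
        (fun σ hσ s hs =>
          ⟨(hcross₁ s hs σ (by simp [hσ])).2, (hcross₁ s hs σ (by simp [hσ])).1⟩) cs
    have step2 : pvMsum S₃ l₁ ≤ pvMsum S₃ l₂ := by
      rw [hl₂']
      apply msum_mono_one hcd _ l₁.length l₁ le_rfl
      intro σ hσ
      exact ⟨syms_nobs σ (hS₃P σ hσ), (hdR σ (by simp [hσ])).2, (hdR σ (by simp [hσ])).1⟩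
    have step3 : pvMsum S₃ l₂ ≤ pvMsum S₃ l₃ :=
      foldR_msum_mono (fun s hs => syms_nobs s (hS₂P s hs))
        (fun σ hσ => syms_nobs σ (hS₃P σ hσ))
        (fun σ hσ s hs =>
          ⟨(hcross₂ s hs σ (by simp [hσ])).2, (hcross₂ s hs σ (by simp [hσ])).1⟩) l₂
    have step4 : pvMsum S₃ l₃ ≤ pvMsum S₃ l₄ := by
      rw [hl₄']
      apply msum_mono_one hcz _ l₃.length l₃ le_rfl
      intro σ hσ
      exact ⟨syms_nobs σ (hS₃P σ hσ), (hzS₃ σ hσ).2, (hzS₃ σ hσ).1⟩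
    omega
  -- scan side
  have hscan := count_scanP cs.length cs le_rfl
  have hmsplit : pvMsum pvSyms cs
      = pvMsum S₁ cs + (occD ('\\' :: d) cs + (pvMsum S₂ cs + (occD ('\\' :: z) cs + pvMsum S₃ cs))) := by
    rw [hsplit]
    simp only [pvMsum, List.map_append, List.map_cons, List.sum_append, List.sum_cons]
  omega

-- the master inequality for a three-backslash fragment: a first pass (d₀) merges the
-- fragment's tail, a second pass (d) then assembles the created command z
theorem masterT (x₀ d₀ a d e z : List Char) (S₀ S₁ S₂ S₃ : List (List Char))
    (hsplit : pvSyms = S₀ ++ d₀ :: (S₁ ++ d :: (S₂ ++ z :: S₃)))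
    (hca : '\\' ∉ a) (hce : '\\' ∉ e)
    (hbx : xBlockedB d₀ ('\\' :: x₀) = true)
    (hmeq : (('\\' :: x₀) ++ d₀ : List Char) = ('\\' :: a) ++ '\\' :: (d ++ e))
    (hda1 : ¬ d <+: a) (hda2 : ¬ a <+: d)
    (hza : ¬ z <+: a) (hz2 : z <+: a ++ (d ++ e))
    (hz51 : ¬ z <+: d ++ e) (hz52 : ¬ (d ++ e) <+: z)
    (hS₀ : ∀ s ∈ S₀, xBlockedB s (('\\' :: x₀) ++ '\\' :: d₀) = true)
    (hS₁ : ∀ s ∈ S₁, xBlockedB s (('\\' :: a) ++ '\\' :: (d ++ e)) = true) :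
    ∀ cs, (('\\' :: x₀) ++ '\\' :: d₀) <:+: cs →
      (pvTexLoop cs).count '\\' + 1 ≤ (scanP pvSyms cs.length cs).count '\\' := by
  intro cs hm
  have hd₀P : d₀ ∈ pvSyms := by rw [hsplit]; simp
  have hdP : d ∈ pvSyms := by rw [hsplit]; simp
  have hzP : z ∈ pvSyms := by rw [hsplit]; simp
  have hcd₀ : '\\' ∉ d₀ := syms_nobs d₀ hd₀P
  have hcd : '\\' ∉ d := syms_nobs d hdP
  have hcz : '\\' ∉ z := syms_nobs z hzP
  have hS₀P : ∀ s ∈ S₀, s ∈ pvSyms := by intro s hs; rw [hsplit]; simp [hs]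
  have hS₁P : ∀ s ∈ S₁, s ∈ pvSyms := by intro s hs; rw [hsplit]; simp [hs]
  have hS₂P : ∀ s ∈ S₂, s ∈ pvSyms := by intro s hs; rw [hsplit]; simp [hs]
  have hS₃P : ∀ s ∈ S₃, s ∈ pvSyms := by intro s hs; rw [hsplit]; simp [hs]
  have hpw : (S₀ ++ d₀ :: (S₁ ++ d :: (S₂ ++ z :: S₃))).Pairwise
      (fun s t => ¬ s <+: t ∧ ¬ t <+: s) := by
    rw [← hsplit]
    refine pvSyms_pairwise.imp ?_
    intro s t hst
    constructor
    · intro hp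
      have := List.isPrefixOf_iff_prefix.mpr hp
      rw [hst.1] at this
      exact absurd this (by simp)
    · intro hp
      have := List.isPrefixOf_iff_prefix.mpr hp
      rw [hst.2] at this
      exact absurd this (by simp)
  rw [List.pairwise_append] at hpw
  obtain ⟨hpwS₀, hpwR, hcross₀⟩ := hpw
  rw [List.pairwise_cons] at hpwR
  obtain ⟨hd₀R, hpwR⟩ := hpwR
  rw [List.pairwise_append] at hpwR
  obtain ⟨hpwS₁, hpwR, hcross₁⟩ := hpwR
  rw [List.pairwise_cons] at hpwR
  obtain ⟨hdR, hpwR⟩ := hpwR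
  rw [List.pairwise_append] at hpwR
  obtain ⟨hpwS₂, hpwZ, hcross₂⟩ := hpwR
  rw [List.pairwise_cons] at hpwZ
  obtain ⟨hzS₃, hpwS₃⟩ := hpwZ
  have hzd1 : ¬ z <+: d := (hdR z (by simp)).2
  have hzd2 : ¬ d <+: z := (hdR z (by simp)).1
  have hfold : pvFoldR pvSyms cs
      = pvFoldR S₃ (pvFoldR [z] (pvFoldR S₂ (pvFoldR [d] (pvFoldR S₁
          (pvFoldR [d₀] (pvFoldR S₀ cs)))))) := by
    rw [hsplit]
    simp only [pvFoldR, List.foldl_append, List.foldl_cons, List.foldl_nil]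
  rw [texLoop_eq_foldR, hfold]
  set l₁ := pvFoldR S₀ cs with hl₁
  set l₂ := pvFoldR [d₀] l₁ with hl₂
  set l₃ := pvFoldR S₁ l₂ with hl₃
  set l₄ := pvFoldR [d] l₃ with hl₄
  set l₅ := pvFoldR S₂ l₄ with hl₅
  set l₆ := pvFoldR [z] l₅ with hl₆
  have hl₂' : l₂ = repAll ('\\' :: d₀) d₀ l₁.length l₁ := rfl
  have hl₄' : l₄ = repAll ('\\' :: d) d l₃.length l₃ := rfl
  have hl₆' : l₆ = repAll ('\\' :: z) z l₅.length l₅ := rfl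
  -- ledgers
  have c7 : l₁.count '\\' + pvMsum S₀ cs ≤ cs.count '\\' := by
    rw [hl₁]; exact ledger (fun s hs => syms_nobs s (hS₀P s hs)) hpwS₀ cs
  have c6 : l₂.count '\\' + occD ('\\' :: d₀) l₁ = l₁.count '\\' := by
    rw [hl₂']; exact count_repAll hcd₀ l₁.length l₁ le_rfl
  have c5 : l₃.count '\\' + pvMsum S₁ l₂ ≤ l₂.count '\\' := by
    rw [hl₃]; exact ledger (fun s hs => syms_nobs s (hS₁P s hs)) hpwS₁ l₂
  have c4 : l₄.count '\\' + occD ('\\' :: d) l₃ = l₃.count '\\' := by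
    rw [hl₄']; exact count_repAll hcd l₃.length l₃ le_rfl
  have c3 : l₅.count '\\' + pvMsum S₂ l₄ ≤ l₄.count '\\' := by
    rw [hl₅]; exact ledger (fun s hs => syms_nobs s (hS₂P s hs)) hpwS₂ l₄
  have c2 : l₆.count '\\' + occD ('\\' :: z) l₅ = l₅.count '\\' := by
    rw [hl₆']; exact count_repAll hcz l₅.length l₅ le_rfl
  have c1 : (pvFoldR S₃ l₆).count '\\' + pvMsum S₃ l₆ ≤ l₆.count '\\' :=
    ledger (fun s hs => syms_nobs s (hS₃P s hs)) hpwS₃ l₆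
  -- fragment propagation
  have mfrag₁ : (('\\' :: x₀) ++ '\\' :: d₀) <:+: l₁ := by
    have hsh : ((('\\' :: x₀) ++ '\\' :: d₀) : List Char)
      = '\\' :: (x₀ ++ '\\' :: d₀) := by simp
    rw [hsh] at hm ⊢
    rw [hl₁]
    exact foldR_pres (fun s hs =>
      ⟨syms_nobs s (hS₀P s hs), by have := hS₀ s hs; rwa [hsh] at this⟩) cs hm
  have mfrag₂ : (('\\' :: a) ++ '\\' :: (d ++ e)) <:+: l₂ := by
    rw [← hmeq, hl₂']
    exact transform hcd₀ hbx l₁.length l₁ le_rfl mfrag₁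
  have mfrag₃ : (('\\' :: a) ++ '\\' :: (d ++ e)) <:+: l₃ := by
    have hsh : ((('\\' :: a) ++ '\\' :: (d ++ e)) : List Char)
      = '\\' :: (a ++ '\\' :: (d ++ e)) := by simp
    rw [hsh] at mfrag₂ ⊢
    rw [hl₃]
    exact foldR_pres (fun s hs =>
      ⟨syms_nobs s (hS₁P s hs), by have := hS₁ s hs; rwa [hsh] at this⟩) l₂ mfrag₂
  -- monotonicity chains
  have m6 : occD ('\\' :: d₀) cs ≤ occD ('\\' :: d₀) l₁ := by
    rw [hl₁]
    exact foldR_mono_occD hcd₀ (fun s hs =>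
      ⟨syms_nobs s (hS₀P s hs),
       (hcross₀ s hs d₀ (by simp)).2, (hcross₀ s hs d₀ (by simp)).1⟩) cs
  have m5 : pvMsum S₁ cs ≤ pvMsum S₁ l₂ := by
    have s1 : pvMsum S₁ cs ≤ pvMsum S₁ l₁ := by
      rw [hl₁]
      exact foldR_msum_mono (fun s hs => syms_nobs s (hS₀P s hs))
        (fun σ hσ => syms_nobs σ (hS₁P σ hσ))
        (fun σ hσ s hs =>
          ⟨(hcross₀ s hs σ (by simp [hσ])).2, (hcross₀ s hs σ (by simp [hσ])).1⟩) cs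
    have s2 : pvMsum S₁ l₁ ≤ pvMsum S₁ l₂ := by
      rw [hl₂']
      apply msum_mono_one hcd₀ _ l₁.length l₁ le_rfl
      intro σ hσ
      exact ⟨syms_nobs σ (hS₁P σ hσ), (hd₀R σ (by simp [hσ])).2, (hd₀R σ (by simp [hσ])).1⟩
    omega
  have m4 : occD ('\\' :: d) cs ≤ occD ('\\' :: d) l₃ := by
    have s1 : occD ('\\' :: d) cs ≤ occD ('\\' :: d) l₁ := by
      rw [hl₁]
      exact foldR_mono_occD hcd (fun s hs =>
        ⟨syms_nobs s (hS₀P s hs),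
         (hcross₀ s hs d (by simp)).2, (hcross₀ s hs d (by simp)).1⟩) cs
    have s2 : occD ('\\' :: d) l₁ ≤ occD ('\\' :: d) l₂ := by
      rw [hl₂']
      exact mono_occD hcd₀ hcd (hd₀R d (by simp)).2 (hd₀R d (by simp)).1 l₁.length l₁ le_rfl
    have s3 : occD ('\\' :: d) l₂ ≤ occD ('\\' :: d) l₃ := by
      rw [hl₃]
      exact foldR_mono_occD hcd (fun s hs =>
        ⟨syms_nobs s (hS₁P s hs),
         (hcross₁ s hs d (by simp)).2, (hcross₁ s hs d (by simp)).1⟩) l₂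
    omega
  have m3 : pvMsum S₂ cs ≤ pvMsum S₂ l₄ := by
    have s1 : pvMsum S₂ cs ≤ pvMsum S₂ l₁ := by
      rw [hl₁]
      exact foldR_msum_mono (fun s hs => syms_nobs s (hS₀P s hs))
        (fun σ hσ => syms_nobs σ (hS₂P σ hσ))
        (fun σ hσ s hs =>
          ⟨(hcross₀ s hs σ (by simp [hσ])).2, (hcross₀ s hs σ (by simp [hσ])).1⟩) cs
    have s2 : pvMsum S₂ l₁ ≤ pvMsum S₂ l₂ := by
      rw [hl₂']
      apply msum_mono_one hcd₀ _ l₁.length l₁ le_rfl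
      intro σ hσ
      exact ⟨syms_nobs σ (hS₂P σ hσ), (hd₀R σ (by simp [hσ])).2, (hd₀R σ (by simp [hσ])).1⟩
    have s3 : pvMsum S₂ l₂ ≤ pvMsum S₂ l₃ := by
      rw [hl₃]
      exact foldR_msum_mono (fun s hs => syms_nobs s (hS₁P s hs))
        (fun σ hσ => syms_nobs σ (hS₂P σ hσ))
        (fun σ hσ s hs =>
          ⟨(hcross₁ s hs σ (by simp [hσ])).2, (hcross₁ s hs σ (by simp [hσ])).1⟩) l₂
    have s4 : pvMsum S₂ l₃ ≤ pvMsum S₂ l₄ := by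
      rw [hl₄']
      apply msum_mono_one hcd _ l₃.length l₃ le_rfl
      intro σ hσ
      exact ⟨syms_nobs σ (hS₂P σ hσ), (hdR σ (by simp [hσ])).2, (hdR σ (by simp [hσ])).1⟩
    omega
  have m2 : occD ('\\' :: z) cs + 1 ≤ occD ('\\' :: z) l₅ := by
    have s1 : occD ('\\' :: z) cs ≤ occD ('\\' :: z) l₁ := by
      rw [hl₁]
      exact foldR_mono_occD hcz (fun s hs =>
        ⟨syms_nobs s (hS₀P s hs),
         (hcross₀ s hs z (by simp)).2, (hcross₀ s hs z (by simp)).1⟩) cs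
    have s2 : occD ('\\' :: z) l₁ ≤ occD ('\\' :: z) l₂ := by
      rw [hl₂']
      exact mono_occD hcd₀ hcz (hd₀R z (by simp)).2 (hd₀R z (by simp)).1 l₁.length l₁ le_rfl
    have s3 : occD ('\\' :: z) l₂ ≤ occD ('\\' :: z) l₃ := by
      rw [hl₃]
      exact foldR_mono_occD hcz (fun s hs =>
        ⟨syms_nobs s (hS₁P s hs),
         (hcross₁ s hs z (by simp)).2, (hcross₁ s hs z (by simp)).1⟩) l₂
    have s4 : occD ('\\' :: z) l₃ + 1 ≤ occD ('\\' :: z) l₄ := by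
      rw [hl₄']
      exact create_count hca hcd hce hcz hda1 hda2 hzd1 hzd2 hza hz2 hz51 hz52
        l₃.length l₃ le_rfl mfrag₃
    have s5 : occD ('\\' :: z) l₄ ≤ occD ('\\' :: z) l₅ := by
      rw [hl₅]
      exact foldR_mono_occD hcz (fun s hs =>
        ⟨syms_nobs s (hS₂P s hs),
         (hcross₂ s hs z (by simp)).2, (hcross₂ s hs z (by simp)).1⟩) l₄
    omega
  have m1 : pvMsum S₃ cs ≤ pvMsum S₃ l₆ := by
    have s1 : pvMsum S₃ cs ≤ pvMsum S₃ l₁ := by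
      rw [hl₁]
      exact foldR_msum_mono (fun s hs => syms_nobs s (hS₀P s hs))
        (fun σ hσ => syms_nobs σ (hS₃P σ hσ))
        (fun σ hσ s hs =>
          ⟨(hcross₀ s hs σ (by simp [hσ])).2, (hcross₀ s hs σ (by simp [hσ])).1⟩) cs
    have s2 : pvMsum S₃ l₁ ≤ pvMsum S₃ l₂ := by
      rw [hl₂']
      apply msum_mono_one hcd₀ _ l₁.length l₁ le_rfl
      intro σ hσ
      exact ⟨syms_nobs σ (hS₃P σ hσ), (hd₀R σ (by simp [hσ])).2, (hd₀R σ (by simp [hσ])).1⟩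
    have s3 : pvMsum S₃ l₂ ≤ pvMsum S₃ l₃ := by
      rw [hl₃]
      exact foldR_msum_mono (fun s hs => syms_nobs s (hS₁P s hs))
        (fun σ hσ => syms_nobs σ (hS₃P σ hσ))
        (fun σ hσ s hs =>
          ⟨(hcross₁ s hs σ (by simp [hσ])).2, (hcross₁ s hs σ (by simp [hσ])).1⟩) l₂
    have s4 : pvMsum S₃ l₃ ≤ pvMsum S₃ l₄ := by
      rw [hl₄']
      apply msum_mono_one hcd _ l₃.length l₃ le_rfl
      intro σ hσ
      exact ⟨syms_nobs σ (hS₃P σ hσ), (hdR σ (by simp [hσ])).2, (hdR σ (by simp [hσ])).1⟩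
    have s5 : pvMsum S₃ l₄ ≤ pvMsum S₃ l₅ := by
      rw [hl₅]
      exact foldR_msum_mono (fun s hs => syms_nobs s (hS₂P s hs))
        (fun σ hσ => syms_nobs σ (hS₃P σ hσ))
        (fun σ hσ s hs =>
          ⟨(hcross₂ s hs σ (by simp [hσ])).2, (hcross₂ s hs σ (by simp [hσ])).1⟩) l₄
    have s6 : pvMsum S₃ l₅ ≤ pvMsum S₃ l₆ := by
      rw [hl₆']
      apply msum_mono_one hcz _ l₅.length l₅ le_rfl
      intro σ hσ
      exact ⟨syms_nobs σ (hS₃P σ hσ), (hzS₃ σ hσ).2, (hzS₃ σ hσ).1⟩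
    omega
  have hscan := count_scanP cs.length cs le_rfl
  have hmsplit : pvMsum pvSyms cs
      = pvMsum S₀ cs + (occD ('\\' :: d₀) cs + (pvMsum S₁ cs + (occD ('\\' :: d) cs
        + (pvMsum S₂ cs + (occD ('\\' :: z) cs + pvMsum S₃ cs))))) := by
    rw [hsplit]
    simp only [pvMsum, List.map_append, List.map_cons, List.sum_append, List.sum_cons]
  omega

set_option maxHeartbeats 4000000 in
set_option maxRecDepth 100000 in
theorem magic_strict (m : List Char) (hm : m ∈ pvMagicChars) :
    ∀ cs, m <:+: cs →
      (pvTexLoop cs).count '\\' + 1 ≤ (scanP pvSyms cs.length cs).count '\\' := by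
  simp only [pvMagicChars, pvMagic, List.map_cons, List.map_nil, List.mem_cons,
    List.not_mem_nil, or_false] at hm
  rcases hm with rfl|rfl|rfl|rfl|rfl|rfl|rfl|rfl|rfl|rfl|rfl|rfl|rfl|rfl|rfl|rfl|rfl|rfl|rfl|rfl|rfl|rfl|rfl|rfl|rfl|rfl|rfl|rfl|rfl|rfl|rfl|rfl|rfl|rfl|rfl|rfl|rfl|rfl|rfl|rfl|rfl|rfl
  · intro cs hcs
    refine master "Del".toList "tau".toList ([] : List Char) "Delta".toList
      (pvSyms.take 17) ((pvSyms.drop 18).take 6) (pvSyms.drop 25)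
      (by decide) (by decide) (by decide) (by decide) (by decide) (by decide)
      (by decide) (by decide) (by decide) (by decide) cs ?_
    have h : ((('\\' :: "Del".toList) ++ '\\' :: ("tau".toList ++ ([] : List Char))) : List Char) = "\\Del\\tau".toList := by decide
    rw [h]; exact hcs
  · intro cs hcs
    refine master "Delt".toList "alpha".toList ([] : List Char) "Delta".toList
      (pvSyms.take 0) ((pvSyms.drop 1).take 23) (pvSyms.drop 25)
      (by decide) (by decide) (by decide) (by decide) (by decide) (by decide)
      (by decide) (by decide) (by decide) (by decide) cs ?_
    have h : ((('\\' :: "Delt".toList) ++ '\\' :: ("alpha".toList ++ ([] : List Char))) : List Char) = "\\Delt\\alpha".toList := by decide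
    rw [h]; exact hcs
  · intro cs hcs
    refine master "Gamm".toList "alpha".toList ([] : List Char) "Gamma".toList
      (pvSyms.take 0) ((pvSyms.drop 1).take 22) (pvSyms.drop 24)
      (by decide) (by decide) (by decide) (by decide) (by decide) (by decide)
      (by decide) (by decide) (by decide) (by decide) cs ?_
    have h : ((('\\' :: "Gamm".toList) ++ '\\' :: ("alpha".toList ++ ([] : List Char))) : List Char) = "\\Gamm\\alpha".toList := by decide
    rw [h]; exact hcs
  · intro cs hcs
    refine master "Lambd".toList "alpha".toList ([] : List Char) "Lambda".toList
      (pvSyms.take 0) ((pvSyms.drop 1).take 25) (pvSyms.drop 27)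
      (by decide) (by decide) (by decide) (by decide) (by decide) (by decide)
      (by decide) (by decide) (by decide) (by decide) cs ?_
    have h : ((('\\' :: "Lambd".toList) ++ '\\' :: ("alpha".toList ++ ([] : List Char))) : List Char) = "\\Lambd\\alpha".toList := by decide
    rw [h]; exact hcs
  · intro cs hcs
    refine master "Ome".toList "gamma".toList ([] : List Char) "Omega".toList
      (pvSyms.take 2) ((pvSyms.drop 3).take 30) (pvSyms.drop 34)
      (by decide) (by decide) (by decide) (by decide) (by decide) (by decide)
      (by decide) (by decide) (by decide) (by decide) cs ?_
    have h : ((('\\' :: "Ome".toList) ++ '\\' :: ("gamma".toList ++ ([] : List Char))) : List Char) = "\\Ome\\gamma".toList := by decide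
    rw [h]; exact hcs
  · intro cs hcs
    refine master "Omeg".toList "alpha".toList ([] : List Char) "Omega".toList
      (pvSyms.take 0) ((pvSyms.drop 1).take 32) (pvSyms.drop 34)
      (by decide) (by decide) (by decide) (by decide) (by decide) (by decide)
      (by decide) (by decide) (by decide) (by decide) cs ?_
    have h : ((('\\' :: "Omeg".toList) ++ '\\' :: ("alpha".toList ++ ([] : List Char))) : List Char) = "\\Omeg\\alpha".toList := by decide
    rw [h]; exact hcs
  · intro cs hcs
    refine master "P".toList "iota".toList ([] : List Char) "Pi".toList
      (pvSyms.take 8) ((pvSyms.drop 9).take 19) (pvSyms.drop 29)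
      (by decide) (by decide) (by decide) (by decide) (by decide) (by decide)
      (by decide) (by decide) (by decide) (by decide) cs ?_
    have h : ((('\\' :: "P".toList) ++ '\\' :: ("iota".toList ++ ([] : List Char))) : List Char) = "\\P\\iota".toList := by decide
    rw [h]; exact hcs
  · intro cs hcs
    refine master "P".toList "sigma".toList ([] : List Char) "Psi".toList
      (pvSyms.take 16) ((pvSyms.drop 17).take 15) (pvSyms.drop 33)
      (by decide) (by decide) (by decide) (by decide) (by decide) (by decide)
      (by decide) (by decide) (by decide) (by decide) cs ?_
    have h : ((('\\' :: "P".toList) ++ '\\' :: ("sigma".toList ++ ([] : List Char))) : List Char) = "\\P\\sigma".toList := by decide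
    rw [h]; exact hcs
  · intro cs hcs
    refine master "Ph".toList "iota".toList ([] : List Char) "Phi".toList
      (pvSyms.take 8) ((pvSyms.drop 9).take 22) (pvSyms.drop 32)
      (by decide) (by decide) (by decide) (by decide) (by decide) (by decide)
      (by decide) (by decide) (by decide) (by decide) cs ?_
    have h : ((('\\' :: "Ph".toList) ++ '\\' :: ("iota".toList ++ ([] : List Char))) : List Char) = "\\Ph\\iota".toList := by decide
    rw [h]; exact hcs
  · intro cs hcs
    refine master "Ps".toList "iota".toList ([] : List Char) "Psi".toList
      (pvSyms.take 8) ((pvSyms.drop 9).take 23) (pvSyms.drop 33)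
      (by decide) (by decide) (by decide) (by decide) (by decide) (by decide)
      (by decide) (by decide) (by decide) (by decide) cs ?_
    have h : ((('\\' :: "Ps".toList) ++ '\\' :: ("iota".toList ++ ([] : List Char))) : List Char) = "\\Ps\\iota".toList := by decide
    rw [h]; exact hcs
  · intro cs hcs
    refine master "Sigm".toList "alpha".toList ([] : List Char) "Sigma".toList
      (pvSyms.take 0) ((pvSyms.drop 1).take 28) (pvSyms.drop 30)
      (by decide) (by decide) (by decide) (by decide) (by decide) (by decide)
      (by decide) (by decide) (by decide) (by decide) cs ?_
    have h : ((('\\' :: "Sigm".toList) ++ '\\' :: ("alpha".toList ++ ([] : List Char))) : List Char) = "\\Sigm\\alpha".toList := by decide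
    rw [h]; exact hcs
  · intro cs hcs
    refine master "Th".toList "eta".toList ([] : List Char) "Theta".toList
      (pvSyms.take 6) ((pvSyms.drop 7).take 18) (pvSyms.drop 26)
      (by decide) (by decide) (by decide) (by decide) (by decide) (by decide)
      (by decide) (by decide) (by decide) (by decide) cs ?_
    have h : ((('\\' :: "Th".toList) ++ '\\' :: ("eta".toList ++ ([] : List Char))) : List Char) = "\\Th\\eta".toList := by decide
    rw [h]; exact hcs
  · intro cs hcs
    refine master "The".toList "tau".toList ([] : List Char) "Theta".toList
      (pvSyms.take 17) ((pvSyms.drop 18).take 7) (pvSyms.drop 26)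
      (by decide) (by decide) (by decide) (by decide) (by decide) (by decide)
      (by decide) (by decide) (by decide) (by decide) cs ?_
    have h : ((('\\' :: "The".toList) ++ '\\' :: ("tau".toList ++ ([] : List Char))) : List Char) = "\\The\\tau".toList := by decide
    rw [h]; exact hcs
  · intro cs hcs
    refine master "Thet".toList "alpha".toList ([] : List Char) "Theta".toList
      (pvSyms.take 0) ((pvSyms.drop 1).take 24) (pvSyms.drop 26)
      (by decide) (by decide) (by decide) (by decide) (by decide) (by decide)
      (by decide) (by decide) (by decide) (by decide) cs ?_
    have h : ((('\\' :: "Thet".toList) ++ '\\' :: ("alpha".toList ++ ([] : List Char))) : List Char) = "\\Thet\\alpha".toList := by decide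
    rw [h]; exact hcs
  · intro cs hcs
    refine masterT ("U\\psilo".toList) ("nu".toList) ("U".toList) ("psi".toList)
      ("lonu".toList) ("Upsilon".toList)
      (pvSyms.take 12) ((pvSyms.drop 13).take 8) ((pvSyms.drop 22).take 8) (pvSyms.drop 31)
      (by decide) (by decide) (by decide) (by decide) (by decide) (by decide)
      (by decide) (by decide) (by decide) (by decide) (by decide) (by decide) (by decide)
      cs ?_
    have h : ((('\\' :: "U\\psilo".toList) ++ '\\' :: "nu".toList) : List Char) = "\\U\\psilo\\nu".toList := by decide
    rw [h]; exact hcs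
  · intro cs hcs
    refine master "U".toList "psi".toList "lon".toList "Upsilon".toList
      (pvSyms.take 21) ((pvSyms.drop 22).take 8) (pvSyms.drop 31)
      (by decide) (by decide) (by decide) (by decide) (by decide) (by decide)
      (by decide) (by decide) (by decide) (by decide) cs ?_
    have h : ((('\\' :: "U".toList) ++ '\\' :: ("psi".toList ++ "lon".toList)) : List Char) = "\\U\\psilon".toList := by decide
    rw [h]; exact hcs
  · intro cs hcs
    refine master "Upsilo".toList "nu".toList ([] : List Char) "Upsilon".toList
      (pvSyms.take 12) ((pvSyms.drop 13).take 17) (pvSyms.drop 31)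
      (by decide) (by decide) (by decide) (by decide) (by decide) (by decide)
      (by decide) (by decide) (by decide) (by decide) cs ?_
    have h : ((('\\' :: "Upsilo".toList) ++ '\\' :: ("nu".toList ++ ([] : List Char))) : List Char) = "\\Upsilo\\nu".toList := by decide
    rw [h]; exact hcs
  · intro cs hcs
    refine master "X".toList "iota".toList ([] : List Char) "Xi".toList
      (pvSyms.take 8) ((pvSyms.drop 9).take 18) (pvSyms.drop 28)
      (by decide) (by decide) (by decide) (by decide) (by decide) (by decide)
      (by decide) (by decide) (by decide) (by decide) cs ?_
    have h : ((('\\' :: "X".toList) ++ '\\' :: ("iota".toList ++ ([] : List Char))) : List Char) = "\\X\\iota".toList := by decide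
    rw [h]; exact hcs
  · intro cs hcs
    refine master "bet".toList "alpha".toList ([] : List Char) "beta".toList
      (pvSyms.take 0) ((pvSyms.drop 1).take 0) (pvSyms.drop 2)
      (by decide) (by decide) (by decide) (by decide) (by decide) (by decide)
      (by decide) (by decide) (by decide) (by decide) cs ?_
    have h : ((('\\' :: "bet".toList) ++ '\\' :: ("alpha".toList ++ ([] : List Char))) : List Char) = "\\bet\\alpha".toList := by decide
    rw [h]; exact hcs
  · intro cs hcs
    refine master "cdo".toList "tau".toList ([] : List Char) "cdot".toList
      (pvSyms.take 17) ((pvSyms.drop 18).take 17) (pvSyms.drop 36)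
      (by decide) (by decide) (by decide) (by decide) (by decide) (by decide)
      (by decide) (by decide) (by decide) (by decide) cs ?_
    have h : ((('\\' :: "cdo".toList) ++ '\\' :: ("tau".toList ++ ([] : List Char))) : List Char) = "\\cdo\\tau".toList := by decide
    rw [h]; exact hcs
  · intro cs hcs
    refine master "cdo".toList "theta".toList ([] : List Char) "cdot".toList
      (pvSyms.take 7) ((pvSyms.drop 8).take 27) (pvSyms.drop 36)
      (by decide) (by decide) (by decide) (by decide) (by decide) (by decide)
      (by decide) (by decide) (by decide) (by decide) cs ?_
    have h : ((('\\' :: "cdo".toList) ++ '\\' :: ("theta".toList ++ ([] : List Char))) : List Char) = "\\cdo\\theta".toList := by decide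
    rw [h]; exact hcs
  · intro cs hcs
    refine master "cdo".toList "times".toList ([] : List Char) "cdot".toList
      (pvSyms.take 34) ((pvSyms.drop 35).take 0) (pvSyms.drop 36)
      (by decide) (by decide) (by decide) (by decide) (by decide) (by decide)
      (by decide) (by decide) (by decide) (by decide) cs ?_
    have h : ((('\\' :: "cdo".toList) ++ '\\' :: ("times".toList ++ ([] : List Char))) : List Char) = "\\cdo\\times".toList := by decide
    rw [h]; exact hcs
  · intro cs hcs
    refine master "ch".toList "iota".toList ([] : List Char) "chi".toList
      (pvSyms.take 8) ((pvSyms.drop 9).take 11) (pvSyms.drop 21)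
      (by decide) (by decide) (by decide) (by decide) (by decide) (by decide)
      (by decide) (by decide) (by decide) (by decide) cs ?_
    have h : ((('\\' :: "ch".toList) ++ '\\' :: ("iota".toList ++ ([] : List Char))) : List Char) = "\\ch\\iota".toList := by decide
    rw [h]; exact hcs
  · intro cs hcs
    refine master "delt".toList "alpha".toList ([] : List Char) "delta".toList
      (pvSyms.take 0) ((pvSyms.drop 1).take 2) (pvSyms.drop 4)
      (by decide) (by decide) (by decide) (by decide) (by decide) (by decide)
      (by decide) (by decide) (by decide) (by decide) cs ?_
    have h : ((('\\' :: "delt".toList) ++ '\\' :: ("alpha".toList ++ ([] : List Char))) : List Char) = "\\delt\\alpha".toList := by decide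
    rw [h]; exact hcs
  · intro cs hcs
    refine master "et".toList "alpha".toList ([] : List Char) "eta".toList
      (pvSyms.take 0) ((pvSyms.drop 1).take 5) (pvSyms.drop 7)
      (by decide) (by decide) (by decide) (by decide) (by decide) (by decide)
      (by decide) (by decide) (by decide) (by decide) cs ?_
    have h : ((('\\' :: "et".toList) ++ '\\' :: ("alpha".toList ++ ([] : List Char))) : List Char) = "\\et\\alpha".toList := by decide
    rw [h]; exact hcs
  · intro cs hcs
    refine master "gamm".toList "alpha".toList ([] : List Char) "gamma".toList
      (pvSyms.take 0) ((pvSyms.drop 1).take 1) (pvSyms.drop 3)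
      (by decide) (by decide) (by decide) (by decide) (by decide) (by decide)
      (by decide) (by decide) (by decide) (by decide) cs ?_
    have h : ((('\\' :: "gamm".toList) ++ '\\' :: ("alpha".toList ++ ([] : List Char))) : List Char) = "\\gamm\\alpha".toList := by decide
    rw [h]; exact hcs
  · intro cs hcs
    refine master "iot".toList "alpha".toList ([] : List Char) "iota".toList
      (pvSyms.take 0) ((pvSyms.drop 1).take 7) (pvSyms.drop 9)
      (by decide) (by decide) (by decide) (by decide) (by decide) (by decide)
      (by decide) (by decide) (by decide) (by decide) cs ?_
    have h : ((('\\' :: "iot".toList) ++ '\\' :: ("alpha".toList ++ ([] : List Char))) : List Char) = "\\iot\\alpha".toList := by decide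
    rw [h]; exact hcs
  · intro cs hcs
    refine master "kapp".toList "alpha".toList ([] : List Char) "kappa".toList
      (pvSyms.take 0) ((pvSyms.drop 1).take 8) (pvSyms.drop 10)
      (by decide) (by decide) (by decide) (by decide) (by decide) (by decide)
      (by decide) (by decide) (by decide) (by decide) cs ?_
    have h : ((('\\' :: "kapp".toList) ++ '\\' :: ("alpha".toList ++ ([] : List Char))) : List Char) = "\\kapp\\alpha".toList := by decide
    rw [h]; exact hcs
  · intro cs hcs
    refine master "lambd".toList "alpha".toList ([] : List Char) "lambda".toList
      (pvSyms.take 0) ((pvSyms.drop 1).take 9) (pvSyms.drop 11)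
      (by decide) (by decide) (by decide) (by decide) (by decide) (by decide)
      (by decide) (by decide) (by decide) (by decide) cs ?_
    have h : ((('\\' :: "lambd".toList) ++ '\\' :: ("alpha".toList ++ ([] : List Char))) : List Char) = "\\lambd\\alpha".toList := by decide
    rw [h]; exact hcs
  · intro cs hcs
    refine master "ome".toList "gamma".toList ([] : List Char) "omega".toList
      (pvSyms.take 2) ((pvSyms.drop 3).take 19) (pvSyms.drop 23)
      (by decide) (by decide) (by decide) (by decide) (by decide) (by decide)
      (by decide) (by decide) (by decide) (by decide) cs ?_
    have h : ((('\\' :: "ome".toList) ++ '\\' :: ("gamma".toList ++ ([] : List Char))) : List Char) = "\\ome\\gamma".toList := by decide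
    rw [h]; exact hcs
  · intro cs hcs
    refine master "omeg".toList "alpha".toList ([] : List Char) "omega".toList
      (pvSyms.take 0) ((pvSyms.drop 1).take 21) (pvSyms.drop 23)
      (by decide) (by decide) (by decide) (by decide) (by decide) (by decide)
      (by decide) (by decide) (by decide) (by decide) cs ?_
    have h : ((('\\' :: "omeg".toList) ++ '\\' :: ("alpha".toList ++ ([] : List Char))) : List Char) = "\\omeg\\alpha".toList := by decide
    rw [h]; exact hcs
  · intro cs hcs
    refine master "p".toList "iota".toList ([] : List Char) "pi".toList
      (pvSyms.take 8) ((pvSyms.drop 9).take 5) (pvSyms.drop 15)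
      (by decide) (by decide) (by decide) (by decide) (by decide) (by decide)
      (by decide) (by decide) (by decide) (by decide) cs ?_
    have h : ((('\\' :: "p".toList) ++ '\\' :: ("iota".toList ++ ([] : List Char))) : List Char) = "\\p\\iota".toList := by decide
    rw [h]; exact hcs
  · intro cs hcs
    refine master "p".toList "sigma".toList ([] : List Char) "psi".toList
      (pvSyms.take 16) ((pvSyms.drop 17).take 4) (pvSyms.drop 22)
      (by decide) (by decide) (by decide) (by decide) (by decide) (by decide)
      (by decide) (by decide) (by decide) (by decide) cs ?_
    have h : ((('\\' :: "p".toList) ++ '\\' :: ("sigma".toList ++ ([] : List Char))) : List Char) = "\\p\\sigma".toList := by decide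
    rw [h]; exact hcs
  · intro cs hcs
    refine master "ph".toList "iota".toList ([] : List Char) "phi".toList
      (pvSyms.take 8) ((pvSyms.drop 9).take 10) (pvSyms.drop 20)
      (by decide) (by decide) (by decide) (by decide) (by decide) (by decide)
      (by decide) (by decide) (by decide) (by decide) cs ?_
    have h : ((('\\' :: "ph".toList) ++ '\\' :: ("iota".toList ++ ([] : List Char))) : List Char) = "\\ph\\iota".toList := by decide
    rw [h]; exact hcs
  · intro cs hcs
    refine master "ps".toList "iota".toList ([] : List Char) "psi".toList
      (pvSyms.take 8) ((pvSyms.drop 9).take 12) (pvSyms.drop 22)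
      (by decide) (by decide) (by decide) (by decide) (by decide) (by decide)
      (by decide) (by decide) (by decide) (by decide) cs ?_
    have h : ((('\\' :: "ps".toList) ++ '\\' :: ("iota".toList ++ ([] : List Char))) : List Char) = "\\ps\\iota".toList := by decide
    rw [h]; exact hcs
  · intro cs hcs
    refine master "sigm".toList "alpha".toList ([] : List Char) "sigma".toList
      (pvSyms.take 0) ((pvSyms.drop 1).take 15) (pvSyms.drop 17)
      (by decide) (by decide) (by decide) (by decide) (by decide) (by decide)
      (by decide) (by decide) (by decide) (by decide) cs ?_
    have h : ((('\\' :: "sigm".toList) ++ '\\' :: ("alpha".toList ++ ([] : List Char))) : List Char) = "\\sigm\\alpha".toList := by decide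
    rw [h]; exact hcs
  · intro cs hcs
    refine master "th".toList "eta".toList ([] : List Char) "theta".toList
      (pvSyms.take 6) ((pvSyms.drop 7).take 0) (pvSyms.drop 8)
      (by decide) (by decide) (by decide) (by decide) (by decide) (by decide)
      (by decide) (by decide) (by decide) (by decide) cs ?_
    have h : ((('\\' :: "th".toList) ++ '\\' :: ("eta".toList ++ ([] : List Char))) : List Char) = "\\th\\eta".toList := by decide
    rw [h]; exact hcs
  · intro cs hcs
    refine master "thet".toList "alpha".toList ([] : List Char) "theta".toList
      (pvSyms.take 0) ((pvSyms.drop 1).take 6) (pvSyms.drop 8)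
      (by decide) (by decide) (by decide) (by decide) (by decide) (by decide)
      (by decide) (by decide) (by decide) (by decide) cs ?_
    have h : ((('\\' :: "thet".toList) ++ '\\' :: ("alpha".toList ++ ([] : List Char))) : List Char) = "\\thet\\alpha".toList := by decide
    rw [h]; exact hcs
  · intro cs hcs
    refine master "time".toList "sigma".toList ([] : List Char) "times".toList
      (pvSyms.take 16) ((pvSyms.drop 17).take 17) (pvSyms.drop 35)
      (by decide) (by decide) (by decide) (by decide) (by decide) (by decide)
      (by decide) (by decide) (by decide) (by decide) cs ?_
    have h : ((('\\' :: "time".toList) ++ '\\' :: ("sigma".toList ++ ([] : List Char))) : List Char) = "\\time\\sigma".toList := by decide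
    rw [h]; exact hcs
  · intro cs hcs
    refine master "upsilo".toList "nu".toList ([] : List Char) "upsilon".toList
      (pvSyms.take 12) ((pvSyms.drop 13).take 5) (pvSyms.drop 19)
      (by decide) (by decide) (by decide) (by decide) (by decide) (by decide)
      (by decide) (by decide) (by decide) (by decide) cs ?_
    have h : ((('\\' :: "upsilo".toList) ++ '\\' :: ("nu".toList ++ ([] : List Char))) : List Char) = "\\upsilo\\nu".toList := by decide
    rw [h]; exact hcs
  · intro cs hcs
    refine master "x".toList "iota".toList ([] : List Char) "xi".toList
      (pvSyms.take 8) ((pvSyms.drop 9).take 4) (pvSyms.drop 14)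
      (by decide) (by decide) (by decide) (by decide) (by decide) (by decide)
      (by decide) (by decide) (by decide) (by decide) cs ?_
    have h : ((('\\' :: "x".toList) ++ '\\' :: ("iota".toList ++ ([] : List Char))) : List Char) = "\\x\\iota".toList := by decide
    rw [h]; exact hcs
  · intro cs hcs
    refine master "zet".toList "alpha".toList ([] : List Char) "zeta".toList
      (pvSyms.take 0) ((pvSyms.drop 1).take 4) (pvSyms.drop 6)
      (by decide) (by decide) (by decide) (by decide) (by decide) (by decide)
      (by decide) (by decide) (by decide) (by decide) cs ?_
    have h : ((('\\' :: "zet".toList) ++ '\\' :: ("alpha".toList ++ ([] : List Char))) : List Char) = "\\zet\\alpha".toList := by decide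
    rw [h]; exact hcs

theorem magic_ne_nil : ∀ m ∈ pvMagicChars, m ≠ [] := by decide
theorem magic_no_dollar : ∀ m ∈ pvMagicChars, '$' ∉ m := by decide

theorem slice_eq {cs : List Char} (h : cs ≠ []) :
    PySem.List.slice cs (some 1) (some (-1)) = (cs.drop 1).take (cs.length - 2) := by
  have hn : 1 ≤ cs.length := List.length_pos_of_ne_nil h
  simp only [PySem.List.slice, PySem.List.clampIdx]
  rw [if_pos (by norm_num), if_neg (by omega), if_neg (by norm_num)]
  have h1 : ((cs.length : Int) + -1).toNat = cs.length - 1 := by omega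
  have h2 : min (Int.toNat 1) cs.length = 1 := by
    simp only [Int.toNat_one]
    omega
  rw [h1, h2]
  have h3 : cs.length - 1 - 1 = cs.length - 2 := by omega
  rw [h3]

theorem frag_slice {m cs : List Char} (hdol : '$' ∉ m) (hne : m ≠ []) (hfrag : m <:+: cs)
    (h0 : PySem.List.pyGet? cs 0 = some '$') (h1 : PySem.List.pyGet? cs (-1) = some '$') :
    m <:+: PySem.List.slice cs (some 1) (some (-1)) := by
  obtain ⟨u, v, rfl⟩ := hfrag
  have hlenpos : 0 < (u ++ m ++ v).length := by
    cases m
    · exact absurd rfl hne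
    · simp
  have hcsne : (u ++ m ++ v) ≠ [] := List.ne_nil_of_length_pos hlenpos
  have hhead : (u ++ (m ++ v))[0]? = some '$' := by
    have hlp : (0 : Int) < (u.length : Int) + ((m.length : Int) + (v.length : Int)) := by
      simp only [List.length_append] at hlenpos
      omega
    simp only [PySem.List.pyGet?, PySem.List.pyIdx?] at h0
    simpa [hlp] using h0
  have hlast : (u ++ m ++ v).getLast? = some '$' := by
    have h1' : (u ++ m ++ v)[(u ++ m ++ v).length - 1]? = some '$' := by
      simp only [PySem.List.pyGet?, PySem.List.pyIdx?] at h1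
      rw [if_neg (by norm_num), if_pos (by
        have := hlenpos
        omega)] at h1
      simpa using h1
    rw [List.getLast?_eq_getElem?]
    exact h1'
  have hu : u ≠ [] := by
    intro h
    subst h
    cases m with
    | nil => exact hne rfl
    | cons mc mt =>
      simp at hhead
      exact hdol (hhead ▸ List.mem_cons_self)

  have hv : v ≠ [] := by
    intro h
    subst h
    rw [List.append_nil, List.getLast?_append_of_ne_nil u hne] at hlast
    exact hdol (List.mem_of_getLast? hlast)
  obtain ⟨c₀, u', rfl⟩ := List.exists_cons_of_ne_nil hu
  obtain ⟨v', vl, rfl⟩ := (List.eq_nil_or_concat v).resolve_left hv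
  rw [slice_eq hcsne]
  have hshape : ((c₀ :: u' ++ m ++ v'.concat vl).drop 1 : List Char)
      = (u' ++ m ++ v') ++ [vl] := by simp
  have hlen2 : (c₀ :: u' ++ m ++ v'.concat vl).length - 2 = (u' ++ m ++ v').length := by
    simp; omega
  rw [hshape, hlen2, List.take_left' rfl]
  exact ⟨u', v', rfl⟩

theorem count_filter_bs (l : List Char) :
    (l.filter (fun c => !(c == ' '))).count '\\' = l.count '\\' := by
  induction l with
  | nil => rfl
  | cons c t ih =>
    by_cases hc : c = ' '
    · subst hc
      rw [List.filter_cons_of_neg (by simp)]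
      rw [ih]
      simp [List.count_cons]
    · rw [List.filter_cons_of_pos (by simp [hc])]
      simp only [List.count_cons, ih]

set_option maxRecDepth 100000 in
set_option maxHeartbeats 2000000 in
theorem goA_ne_goB : ∀ (fuel : Nat) (cs : List Char) (strip : Bool), cs.length ≤ fuel →
    (∃ m ∈ pvMagicChars, m <:+: cs) → pvGoA fuel cs strip ≠ pvGoB fuel cs strip := by
  intro fuel
  induction fuel with
  | zero =>
    intro cs strip hf hmag
    obtain ⟨m, hmP, hmcs⟩ := hmag
    have : cs = [] := by cases cs <;> simp_all
    subst this
    exact absurd (List.infix_nil.mp hmcs) (magic_ne_nil m hmP)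
  | succ f ih =>
    intro cs strip hf hmag
    obtain ⟨m, hmP, hmcs⟩ := hmag
    have hcsne : cs ≠ [] := by
      intro h
      subst h
      exact absurd (List.infix_nil.mp hmcs) (magic_ne_nil m hmP)
    rw [pvGoA, pvGoB, if_neg hcsne, if_neg hcsne]
    by_cases hd : PySem.List.pyGet? cs 0 = some '$' ∧ PySem.List.pyGet? cs (-1) = some '$'
    · rw [if_pos hd, if_pos hd]
      apply ih _ true (by have := pvSliceLen cs hcsne; omega)
      exact ⟨m, hmP, frag_slice (magic_no_dollar m hmP) (magic_ne_nil m hmP) hmcs hd.1 hd.2⟩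
    · rw [if_neg hd, if_neg hd]
      have hstrict := magic_strict m hmP cs hmcs
      intro heq
      cases strip with
      | false =>
        rw [scanB_false_eq] at heq
        simp only [Bool.false_eq_true, if_false] at heq
        rw [heq] at hstrict
        omega
      | true =>
        rw [scanB_true_eq] at heq
        simp only [if_true] at heq
        rw [replace_eq_repAll _ [' '] [] (by simp), repAll_space _ _ le_rfl] at heq
        have h1 := count_filter_bs (pvTexLoop cs)
        have h2 := count_filter_bs (scanP pvSyms cs.length cs)
        rw [heq, h2] at h1
        omega

-- ===== VERDICT (by name: the statements are the Claim_ definitions above) =====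
theorem str_plain_spec : Claim_unchanged_str_plain := by
  intro label strip _
  intro hD
  show str_plain label strip = str_plain_alt label strip
  cases label with
  | none => rfl
  | some l =>
    show String.ofList (pvGoA l.toList.length l.toList strip) = String.ofList (pvGoB l.toList.length l.toList strip)
    have hnm : NoMagic l.toList := by
      intro m hm hinf
      obtain ⟨ms, hms, rfl⟩ := List.mem_map.mp hm
      apply hD
      refine ⟨ms, hms, ?_⟩
      rw [show ((some l).getD "") = l from rfl, PySem.Str.isIn_iff_infix]
      simpa using hinf
    exact congrArg String.ofList (goA_eq_goB l.toList.length l.toList strip le_rfl hnm)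

set_option maxRecDepth 100000 in
theorem str_plain_changed : Claim_changed_str_plain := by
  unfold Claim_changed_str_plain; decide

theorem magic_toList_ne_nil : ∀ m ∈ pvMagic, m.toList ≠ [] := by decide

theorem str_plain_tight : Claim_exact_str_plain := by
  intro label strip _ hD
  obtain ⟨m, hm, hin⟩ := hD
  cases label with
  | none =>
    exfalso
    rw [show ((none : Option String).getD "") = "" from rfl] at hin
    have : m.toList <:+: ("" : String).toList := (PySem.Str.isIn_iff_infix m "").mp hin
    exact absurd (List.infix_nil.mp this) (magic_toList_ne_nil m hm)
  | some l =>
    have hfrag : m.toList <:+: l.toList := by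
      rw [show ((some l).getD "") = l from rfl] at hin
      exact (PySem.Str.isIn_iff_infix m l).mp hin
    have hmP : m.toList ∈ pvMagicChars := List.mem_map_of_mem hm
    have hne := goA_ne_goB l.toList.length l.toList strip le_rfl ⟨m.toList, hmP, hfrag⟩
    intro heq
    apply hne
    have := congrArg String.toList heq
    simpa [str_plain, str_plain_alt] using this
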